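-- pv_equiv track=rewrite | github.com/amol-ship-it/agi-core | domains/arc/transformation_primitives.py | most_colorful_subgrid
-- ===== SOURCE A (Python) =====
-- Grid = list[list[int]]
--
-- def most_colorful_subgrid(grid: Grid) -> Grid:
--     """Extract the connected component with the most distinct colors in its bbox."""
--     if not grid or not grid[0]:
--         return grid
--     h, w = len(grid), len(grid[0])
--     visited = [[False] * w for _ in range(h)]
--     best_grid = grid
--     best_colors = -1
--
--     for r in range(h):
--         for c in range(w):
--             if grid[r][c] != 0 and not visited[r][c]:
--                 comp = []
--                 stack = [(r, c)]
--                 visited[r][c] = True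
--                 while stack:
--                     cr, cc = stack.pop()
--                     comp.append((cr, cc))
--                     for dr, dc in [(-1, 0), (1, 0), (0, -1), (0, 1),
--                                    (-1, -1), (-1, 1), (1, -1), (1, 1)]:
--                         nr, nc = cr + dr, cc + dc
--                         if 0 <= nr < h and 0 <= nc < w and not visited[nr][nc] and grid[nr][nc] != 0:
--                             visited[nr][nc] = True
--                             stack.append((nr, nc))
--                 r0 = min(p[0] for p in comp)
--                 c0 = min(p[1] for p in comp)
--                 r1 = max(p[0] for p in comp)
--                 c1 = max(p[1] for p in comp)
--                 colors = set()
--                 for rr in range(r0, r1 + 1):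
--                     for cc in range(c0, c1 + 1):
--                         if grid[rr][cc] != 0:
--                             colors.add(grid[rr][cc])
--                 if len(colors) > best_colors:
--                     best_colors = len(colors)
--                     best_grid = [grid[rr][c0:c1 + 1] for rr in range(r0, r1 + 1)]
--     return best_grid
-- ===== SOURCE B (Python) =====
-- def most_colorful_subgrid(grid):
--     """Extract the connected component with the most distinct colors in its bbox."""
--     if not grid or not grid[0]:
--         return grid
--     h, w = len(grid), len(grid[0])
--
--     # two-pass connected-component labeling with union-find, union by smaller flat
--     # index, so each component's final root is its first cell in row-major order
--     parent = list(range(h * w))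
--
--     def find(i):
--         while parent[i] != i:
--             i = parent[i]
--         return i
--
--     for r in range(h):
--         for c in range(w):
--             if grid[r][c] != 0:
--                 for (nr, nc) in ((r, c - 1), (r - 1, c - 1), (r - 1, c), (r - 1, c + 1)):
--                     if 0 <= nr and 0 <= nc < w and grid[nr][nc] != 0:
--                         a, b = find(r * w + c), find(nr * w + nc)
--                         if a != b:
--                             if a < b:
--                                 parent[b] = a
--                             else:
--                                 parent[a] = b
--
--     # one more pass: accumulate each component's bounding box, keyed by its root
--     boxes = {}
--     for r in range(h):
--         for c in range(w):
--             if grid[r][c] != 0: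
--                 root = find(r * w + c)
--                 if root in boxes:
--                     r0, r1, c0, c1 = boxes[root]
--                     boxes[root] = (min(r0, r), max(r1, r), min(c0, c), max(c1, c))
--                 else:
--                     boxes[root] = (r, r, c, c)
--
--     best_grid, best_colors = grid, -1
--     for (r0, r1, c0, c1) in boxes.values():
--         colors = len({grid[rr][cc] for rr in range(r0, r1 + 1)
--                       for cc in range(c0, c1 + 1) if grid[rr][cc] != 0})
--         if colors > best_colors:
--             best_colors = colors
--             best_grid = [grid[rr][c0:c1 + 1] for rr in range(r0, r1 + 1)]
--     return best_grid
-- ===== Notes on version B (the rewrite author's own statement) =====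
-- stated objective: alternative
-- what changed: A grows each component with a DFS stack interleaved with a visited matrix and keeps a running best subgrid as it scans; B does two-pass connected-component labeling with a union-find over flat cell indices (union by smaller index, so each root is its component's first cell in scan order), then accumulates each root's bounding box in a dictionary and selects the best box in a final pass.
-- outside the precondition, e.g. on most_colorful_subgrid([[1, 2], [3]]): A raises IndexError, B raises IndexError
import Mathlib
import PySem

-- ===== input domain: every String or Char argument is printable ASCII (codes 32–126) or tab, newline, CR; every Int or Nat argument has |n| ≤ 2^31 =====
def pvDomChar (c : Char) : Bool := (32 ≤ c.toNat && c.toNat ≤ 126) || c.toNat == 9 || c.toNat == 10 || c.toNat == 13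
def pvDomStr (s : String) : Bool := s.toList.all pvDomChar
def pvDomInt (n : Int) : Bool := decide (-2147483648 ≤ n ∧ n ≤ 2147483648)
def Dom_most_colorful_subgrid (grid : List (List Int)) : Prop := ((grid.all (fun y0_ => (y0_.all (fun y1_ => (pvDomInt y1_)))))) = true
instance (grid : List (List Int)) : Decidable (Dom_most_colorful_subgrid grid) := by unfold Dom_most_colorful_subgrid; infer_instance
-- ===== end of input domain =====

-- B replaces A's interleaved flood-fill-with-running-best by two-pass connected-component
-- labeling with union-find (union by smaller flat index) plus a bbox dictionary keyed by
-- each component's root, and a final selection pass (alternative algorithm, similar cost).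


-- ===== PORT A =====
-- grid[r][c] (indices produced by the loops are always in range on Pre_ inputs)
def pvCell (grid : List (List Int)) (r c : Int) : Int :=
  PySem.List.pyGetD (PySem.List.pyGetD grid r []) c 0

def pvVGet (v : List (List Bool)) (r c : Int) : Bool :=
  PySem.List.pyGetD (PySem.List.pyGetD v r []) c false

def pvVSet (v : List (List Bool)) (r c : Int) : List (List Bool) :=
  PySem.List.pySetD v r (PySem.List.pySetD (PySem.List.pyGetD v r []) c true)

def pvDeltas : List (Int × Int) :=
  [(-1,0), (1,0), (0,-1), (0,1), (-1,-1), (-1,1), (1,-1), (1,1)]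

-- the inner 'for dr, dc in [...]' of A's DFS: mark and push the fresh neighbours
def pvPush (grid : List (List Int)) (h w : Int) (cr cc : Int)
    (st : List (List Bool) × List (Int × Int)) : List (List Bool) × List (Int × Int) :=
  pvDeltas.foldl (fun st d =>
    if 0 ≤ cr + d.1 ∧ cr + d.1 < h ∧ 0 ≤ cc + d.2 ∧ cc + d.2 < w ∧
        pvVGet st.1 (cr + d.1) (cc + d.2) = false ∧ pvCell grid (cr + d.1) (cc + d.2) ≠ 0 then
      (pvVSet st.1 (cr + d.1) (cc + d.2), st.2 ++ [(cr + d.1, cc + d.2)])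
    else st) st

-- A's 'while stack' loop (stack.pop() takes the last element); the fuel h*w+1 never
-- runs out: every iteration pops one cell and each push marks a fresh cell (proved below)
def pvDfs (grid : List (List Int)) (h w : Int) :
    Nat → List (List Bool) → List (Int × Int) → List (Int × Int) →
    List (List Bool) × List (Int × Int)
  | 0, visited, _, comp => (visited, comp)
  | fuel + 1, visited, stack, comp =>
    match stack.getLast? with
    | none => (visited, comp)
    | some p =>
      let st := pvPush grid h w p.1 p.2 (visited, stack.dropLast)
      pvDfs grid h w fuel st.1 st.2 (comp ++ [p])

-- the 'colors' set of A (and the identical set comprehension of B)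
def pvColors (grid : List (List Int)) (r0 r1 c0 c1 : Int) : PySem.Set Int :=
  (PySem.List.pyRange r0 (r1 + 1) 1).foldl (fun s rr =>
    (PySem.List.pyRange c0 (c1 + 1) 1).foldl (fun s cc =>
      if pvCell grid rr cc ≠ 0 then PySem.Set.add s (pvCell grid rr cc) else s) s)
    (PySem.Set.ofList [])

-- body of A's double scan for one (r, c): state = (visited, best_grid, best_colors)
def pvStepA (grid : List (List Int)) (h w : Int)
    (st : List (List Bool) × List (List Int) × Int) (r c : Int) :
    List (List Bool) × List (List Int) × Int :=
  if pvCell grid r c ≠ 0 ∧ pvVGet st.1 r c = false then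
    let res := pvDfs grid h w (h.toNat * w.toNat + 1) (pvVSet st.1 r c) [(r, c)] []
    let r0 := (PySem.List.min? (res.2.map (·.1)) (fun x => x)).getD 0
    let c0 := (PySem.List.min? (res.2.map (·.2)) (fun x => x)).getD 0
    let r1 := (PySem.List.max? (res.2.map (·.1)) (fun x => x)).getD 0
    let c1 := (PySem.List.max? (res.2.map (·.2)) (fun x => x)).getD 0
    let colors := pvColors grid r0 r1 c0 c1
    if (colors.length : Int) > st.2.2 then
      (res.1,
       (PySem.List.pyRange r0 (r1 + 1) 1).map (fun rr =>
         PySem.List.slice (PySem.List.pyGetD grid rr []) (some c0) (some (c1 + 1))),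
       (colors.length : Int))
    else (res.1, st.2.1, st.2.2)
  else st

def most_colorful_subgrid (grid : List (List Int)) : List (List Int) :=
  if grid = [] ∨ grid.headD [] = [] then grid
  else
    let h : Int := grid.length
    let w : Int := (grid.headD []).length
    let visited := (PySem.List.pyRange 0 h 1).map (fun _ => PySem.List.pyRepeat [false] w)
    let res := (PySem.List.pyRange 0 h 1).foldl (fun st r =>
      (PySem.List.pyRange 0 w 1).foldl (fun st c => pvStepA grid h w st r c) st)
      (visited, grid, (-1 : Int))
    res.2.1

-- ===== PORT B =====
-- the four already-scanned neighbours (r, c-1), (r-1, c-1), (r-1, c), (r-1, c+1)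
def pvNbrs (r c : Int) : List (Int × Int) :=
  [(r, c - 1), (r - 1, c - 1), (r - 1, c), (r - 1, c + 1)]

-- B's 'while parent[i] != i: i = parent[i]' (fuel only makes the loop total; with
-- union-by-smaller-index the chain strictly decreases, so fuel h*w+1 never runs out)
def pvFind (parent : List Int) : Nat → Int → Int
  | 0, i => i
  | fuel + 1, i =>
    if PySem.List.pyGetD parent i 0 = i then i
    else pvFind parent fuel (PySem.List.pyGetD parent i 0)

-- phase 1 body for one (r, c): union with the valid nonzero already-scanned neighbours
def pvUnionCell (grid : List (List Int)) (h w : Int) (parent : List Int) (r c : Int) :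
    List Int :=
  if pvCell grid r c ≠ 0 then
    (pvNbrs r c).foldl (fun parent q =>
      if 0 ≤ q.1 ∧ 0 ≤ q.2 ∧ q.2 < w ∧ pvCell grid q.1 q.2 ≠ 0 then
        let a := pvFind parent (h.toNat * w.toNat + 1) (r * w + c)
        let b := pvFind parent (h.toNat * w.toNat + 1) (q.1 * w + q.2)
        if a ≠ b then
          if a < b then PySem.List.pySetD parent b a
          else PySem.List.pySetD parent a b
        else parent
      else parent) parent
  else parent

-- phase 2 body for one (r, c): extend (or create) the bbox of this cell's root
def pvBoxCell (grid : List (List Int)) (h w : Int) (parent : List Int)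
    (boxes : PySem.Dict Int (Int × Int × Int × Int)) (r c : Int) :
    PySem.Dict Int (Int × Int × Int × Int) :=
  if pvCell grid r c ≠ 0 then
    let root := pvFind parent (h.toNat * w.toNat + 1) (r * w + c)
    match PySem.Dict.get? boxes root with
    | some bb => PySem.Dict.insert boxes root (min bb.1 r, max bb.2.1 r, min bb.2.2.1 c, max bb.2.2.2 c)
    | none => PySem.Dict.insert boxes root (r, r, c, c)
  else boxes

-- phase 3 body: count the distinct nonzero colors of one bbox, keep it if strictly better
def pvSelStepB (grid : List (List Int)) (acc : List (List Int) × Int)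
    (bb : Int × Int × Int × Int) : List (List Int) × Int :=
  let colors := pvColors grid bb.1 bb.2.1 bb.2.2.1 bb.2.2.2
  if (colors.length : Int) > acc.2 then
    ((PySem.List.pyRange bb.1 (bb.2.1 + 1) 1).map (fun rr =>
      PySem.List.slice (PySem.List.pyGetD grid rr []) (some bb.2.2.1) (some (bb.2.2.2 + 1))),
     (colors.length : Int))
  else acc

def most_colorful_subgrid_alt (grid : List (List Int)) : List (List Int) :=
  if grid = [] ∨ grid.headD [] = [] then grid
  else
    let h : Int := grid.length
    let w : Int := (grid.headD []).length
    let parent0 := PySem.List.pyRange 0 (h * w) 1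
    let parent := (PySem.List.pyRange 0 h 1).foldl (fun par r =>
      (PySem.List.pyRange 0 w 1).foldl (fun par c => pvUnionCell grid h w par r c) par)
      parent0
    let boxes := (PySem.List.pyRange 0 h 1).foldl (fun bx r =>
      (PySem.List.pyRange 0 w 1).foldl (fun bx c => pvBoxCell grid h w parent bx r c) bx)
      PySem.Dict.empty
    ((PySem.Dict.values boxes).foldl (pvSelStepB grid) (grid, -1)).1

-- ===== PRECONDITION & SPEC =====
-- Pre_ excludes exactly the ragged grids with a row shorter than row 0, on which Python A
-- raises IndexError at grid[r][c] (rows longer than row 0 are fine and stay inside Pre_).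
def Pre_most_colorful_subgrid (grid : List (List Int)) : Prop :=
  ∀ row ∈ grid, (grid.headD []).length ≤ row.length

instance (grid : List (List Int)) : Decidable (Pre_most_colorful_subgrid grid) := by
  unfold Pre_most_colorful_subgrid; infer_instance

def pvWitness_most_colorful_subgrid : List (List Int) := [[1, 0], [0, 2]]

def Spec_most_colorful_subgrid (grid : List (List Int)) (out : List (List Int)) : Prop :=
  out = most_colorful_subgrid_alt grid
instance (grid : List (List Int)) (out : List (List Int)) : Decidable (Spec_most_colorful_subgrid grid out) := by
  unfold Spec_most_colorful_subgrid; infer_instance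

-- ===== CLAIM (what is proved, stated in full; the proofs are below) =====
def Claim_equal_most_colorful_subgrid : Prop :=
  ∀ (grid : List (List Int)), Dom_most_colorful_subgrid grid →
    Pre_most_colorful_subgrid grid →
    Spec_most_colorful_subgrid grid (most_colorful_subgrid grid)

-- ===== LEMMAS AND PROOFS =====
-- connectivity notions the proof is about
def gH (grid : List (List Int)) : Int := (grid.length : Int)
def gW (grid : List (List Int)) : Int := ((grid.headD []).length : Int)
def gOk (grid : List (List Int)) (p : Int × Int) : Prop :=
  0 ≤ p.1 ∧ p.1 < gH grid ∧ 0 ≤ p.2 ∧ p.2 < gW grid ∧ pvCell grid p.1 p.2 ≠ 0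
def gAdj (grid : List (List Int)) (p q : Int × Int) : Prop :=
  gOk grid p ∧ gOk grid q ∧ (q.1 - p.1, q.2 - p.2) ∈ pvDeltas
def gReach (grid : List (List Int)) (s p : Int × Int) : Prop :=
  Relation.ReflTransGen (gAdj grid) s p
def VShape (v : List (List Bool)) (grid : List (List Int)) : Prop :=
  v.length = grid.length ∧ ∀ row ∈ v, row.length = (grid.headD []).length
def gCellList (grid : List (List Int)) : List (Int × Int) :=
  (PySem.List.pyRange 0 (gH grid) 1) ×ˢ (PySem.List.pyRange 0 (gW grid) 1)
def gUnm (grid : List (List Int)) (v : List (List Bool)) : Nat :=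
  (gCellList grid).countP (fun p => pvVGet v p.1 p.2 = false)

lemma mem_pvDeltas_iff (a b : Int) :
    (a, b) ∈ pvDeltas ↔ ¬(a = 0 ∧ b = 0) ∧ -1 ≤ a ∧ a ≤ 1 ∧ -1 ≤ b ∧ b ≤ 1 := by
  simp [pvDeltas, Prod.ext_iff]
  omega

lemma mem_gCellList_iff (grid : List (List Int)) (p : Int × Int) :
    p ∈ gCellList grid ↔ 0 ≤ p.1 ∧ p.1 < gH grid ∧ 0 ≤ p.2 ∧ p.2 < gW grid := by
  obtain ⟨a, b⟩ := p
  rw [gCellList, List.mem_product, PySem.List.mem_pyRange_one, PySem.List.mem_pyRange_one]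
  tauto

lemma nodup_gCellList (grid : List (List Int)) : (gCellList grid).Nodup :=
  List.Nodup.product (PySem.List.nodup_pyRange_one 0 (gH grid)) (PySem.List.nodup_pyRange_one 0 (gW grid))

lemma length_gCellList (grid : List (List Int)) :
    (gCellList grid).length = (gH grid).toNat * (gW grid).toNat := by
  rw [gCellList, List.length_product, PySem.List.length_pyRange_one, PySem.List.length_pyRange_one]
  simp

lemma gAdj_symm {grid : List (List Int)} {p q : Int × Int} (h : gAdj grid p q) : gAdj grid q p := by
  obtain ⟨hp, hq, hd⟩ := h
  refine ⟨hq, hp, ?_⟩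
  have := (mem_pvDeltas_iff (q.1 - p.1) (q.2 - p.2)).1 hd
  rw [mem_pvDeltas_iff]; omega

lemma reach_ok {grid : List (List Int)} {s p : Int × Int} (hs : gOk grid s)
    (h : gReach grid s p) : gOk grid p := by
  induction h with
  | refl => exact hs
  | tail _ hadj ih => exact hadj.2.1

lemma gReach_symm {grid : List (List Int)} {p q : Int × Int} (h : gReach grid p q) :
    gReach grid q p :=
  (Relation.ReflTransGen.symmetric (fun _ _ hab => gAdj_symm hab)) h

lemma reach_not_V0 {grid : List (List Int)} {V0 : Int × Int → Prop}
    (hcl : ∀ p q, V0 p → gAdj grid p q → V0 q) {s p : Int × Int}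
    (hs : ¬ V0 s) (h : gReach grid s p) : ¬ V0 p := by
  induction h with
  | refl => exact hs
  | tail _ hadj ih => exact fun hv => ih (hcl _ _ hv (gAdj_symm hadj))

-- matrix access through nonnegative indices, in Nat world
lemma pvVGet_nonneg (v : List (List Bool)) {r c : Int} (hr : 0 ≤ r) (hc : 0 ≤ c) :
    pvVGet v r c = (v.getD r.toNat []).getD c.toNat false := by
  unfold pvVGet
  rw [PySem.List.pyGetD_of_nonneg _ _ hr, PySem.List.pyGetD_of_nonneg _ _ hc]

lemma pvVSet_nonneg (v : List (List Bool)) {r c : Int} (hr : 0 ≤ r) (hc : 0 ≤ c) :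
    pvVSet v r c = v.set r.toNat ((v.getD r.toNat []).set c.toNat true) := by
  unfold pvVSet
  rw [PySem.List.pySetD_of_nonneg _ _ hr, PySem.List.pySetD_of_nonneg _ _ hc,
    PySem.List.pyGetD_of_nonneg _ _ hr]
lemma row_len {v : List (List Bool)} {grid : List (List Int)} (hsh : VShape v grid)
    {n : Nat} (hn : n < v.length) : (v.getD n []).length = (grid.headD []).length := by
  rw [List.getD_eq_getElem?_getD, List.getElem?_eq_getElem hn]
  exact hsh.2 _ (List.getElem_mem hn)

lemma pvVGet_true_ok {v : List (List Bool)} {grid : List (List Int)} (hsh : VShape v grid)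
    {r c : Int} (hr : 0 ≤ r) (hc : 0 ≤ c) (h : pvVGet v r c = true) :
    r < gH grid ∧ c < gW grid := by
  rw [pvVGet_nonneg v hr hc] at h
  have hv := hsh.1
  by_cases h1 : r.toNat < v.length
  · have hl := row_len hsh h1
    by_cases h2 : c.toNat < (v.getD r.toNat []).length
    · rw [gH, gW]; omega
    · rw [List.getD_eq_getElem?_getD (l := v.getD r.toNat []), List.getElem?_eq_none (by omega)] at h
      simp at h
  · rw [List.getD_eq_getElem?_getD (l := v), List.getElem?_eq_none (by omega)] at h
    simp at h

lemma VShape_pvVSet {v : List (List Bool)} {grid : List (List Int)} (hsh : VShape v grid)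
    {r c : Int} (hr : 0 ≤ r) (hc : 0 ≤ c) : VShape (pvVSet v r c) grid := by
  rw [pvVSet_nonneg v hr hc]
  by_cases h1 : r.toNat < v.length
  · refine ⟨by simpa using hsh.1, ?_⟩
    intro row hrow
    rcases List.mem_or_eq_of_mem_set hrow with h | h
    · exact hsh.2 _ h
    · subst h
      rw [List.length_set]
      exact row_len hsh h1
  · rw [List.set_eq_of_length_le (by omega)]
    exact hsh

lemma pvVGet_pvVSet (v : List (List Bool)) {r c r' c' : Int}
    (hr : 0 ≤ r) (hc : 0 ≤ c) (hr' : 0 ≤ r') (hc' : 0 ≤ c')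
    (hrv : r.toNat < v.length) (hcv : c.toNat < (v.getD r.toNat []).length) :
    pvVGet (pvVSet v r c) r' c' = if r' = r ∧ c' = c then true else pvVGet v r' c' := by
  rw [pvVSet_nonneg v hr hc, pvVGet_nonneg _ hr' hc', pvVGet_nonneg v hr' hc']
  by_cases h1 : r' = r
  · subst h1
    rw [List.getD_eq_getElem?_getD (l := v.set _ _), List.getElem?_set_self hrv]
    by_cases h2 : c' = c
    · subst h2
      simp only [Option.getD_some]
      rw [List.getD_eq_getElem?_getD, List.getElem?_set_self hcv]
      simp
    · have hnc : c.toNat ≠ c'.toNat := by omega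
      simp only [Option.getD_some]
      rw [List.getD_eq_getElem?_getD, List.getElem?_set_ne hnc, ← List.getD_eq_getElem?_getD]
      simp [h2]
  · have hnr : r.toNat ≠ r'.toNat := by omega
    rw [List.getD_eq_getElem?_getD (l := v.set _ _), List.getElem?_set_ne hnr,
      ← List.getD_eq_getElem?_getD]
    simp [h1]

lemma countP_flip {α : Type} [DecidableEq α] {P P' : α → Bool} {q : α} :
    ∀ {l : List α}, l.Nodup → q ∈ l → P q = true → P' q = false →
    (∀ x ∈ l, x ≠ q → P' x = P x) → l.countP P' + 1 = l.countP P := by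
  intro l
  induction l with
  | nil => intro _ h; cases h
  | cons a t ih =>
    intro hnd hq hPq hP'q hag
    rcases List.mem_cons.1 hq with rfl | hqt
    · have ht : t.countP P' = t.countP P := by
        apply List.countP_congr
        intro x hx
        rw [hag x (List.mem_cons_of_mem _ hx) (fun hxa => (List.nodup_cons.1 hnd).1 (hxa ▸ hx))]
      rw [List.countP_cons, List.countP_cons, hPq, hP'q, ht]
      simp
    · have ha : P' a = P a := hag a (List.mem_cons_self) (fun h => (List.nodup_cons.1 hnd).1 (h ▸ hqt))
      rw [List.countP_cons, List.countP_cons, ha]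
      have := ih (List.nodup_cons.1 hnd).2 hqt hPq hP'q (fun x hx => hag x (List.mem_cons_of_mem _ hx))
      omega

lemma gUnm_le (grid : List (List Int)) (v : List (List Bool)) :
    gUnm grid v ≤ (gH grid).toNat * (gW grid).toNat := by
  rw [gUnm, ← length_gCellList]
  exact List.countP_le_length

lemma gUnm_pvVSet {grid : List (List Int)} {v : List (List Bool)} (hsh : VShape v grid)
    {r c : Int} (hr : 0 ≤ r) (hc : 0 ≤ c) (hrh : r < gH grid) (hcw : c < gW grid)
    (hunm : pvVGet v r c = false) :
    gUnm grid (pvVSet v r c) + 1 = gUnm grid v := by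
  have hv := hsh.1
  have hrv : r.toNat < v.length := by rw [gH] at hrh; omega
  have hcv : c.toNat < (v.getD r.toNat []).length := by rw [row_len hsh hrv]; rw [gW] at hcw; omega
  have hget := fun r' c' hr' hc' => pvVGet_pvVSet v hr hc hr' hc' hrv hcv (r' := r') (c' := c')
  apply countP_flip (nodup_gCellList grid) ((mem_gCellList_iff grid (r, c)).2 ⟨hr, hrh, hc, hcw⟩)
  · simpa using hunm
  · simp [hget r c hr hc]
  · intro x hx hxq
    rw [mem_gCellList_iff] at hx
    simp only [decide_eq_decide]
    rw [hget x.1 x.2 hx.1 hx.2.2.1]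
    have : ¬ (x.1 = r ∧ x.2 = c) := by
      intro hcon
      exact hxq (Prod.ext hcon.1 hcon.2)
    simp [this]

def pvPushStep (grid : List (List Int)) (h w cr cc : Int)
    (st : List (List Bool) × List (Int × Int)) (d : Int × Int) :
    List (List Bool) × List (Int × Int) :=
  if 0 ≤ cr + d.1 ∧ cr + d.1 < h ∧ 0 ≤ cc + d.2 ∧ cc + d.2 < w ∧
      pvVGet st.1 (cr + d.1) (cc + d.2) = false ∧ pvCell grid (cr + d.1) (cc + d.2) ≠ 0 then
    (pvVSet st.1 (cr + d.1) (cc + d.2), st.2 ++ [(cr + d.1, cc + d.2)])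
  else st

lemma pvPush_eq (grid : List (List Int)) (h w cr cc : Int)
    (st : List (List Bool) × List (Int × Int)) :
    pvPush grid h w cr cc st = pvDeltas.foldl (pvPushStep grid h w cr cc) st := rfl

lemma pvPush_fold (grid : List (List Int)) (cr cc : Int) (hok0 : gOk grid (cr, cc)) :
    ∀ (ds : List (Int × Int)), (∀ d ∈ ds, d ∈ pvDeltas) →
    ∀ (v : List (List Bool)) (rest : List (Int × Int)), VShape v grid →
    ∃ new : List (Int × Int),
      (ds.foldl (pvPushStep grid (gH grid) (gW grid) cr cc) (v, rest)).2 = rest ++ new ∧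
      VShape (ds.foldl (pvPushStep grid (gH grid) (gW grid) cr cc) (v, rest)).1 grid ∧
      (∀ q ∈ new, gAdj grid (cr, cc) q) ∧
      (∀ p : Int × Int, 0 ≤ p.1 → 0 ≤ p.2 →
        (pvVGet (ds.foldl (pvPushStep grid (gH grid) (gW grid) cr cc) (v, rest)).1 p.1 p.2 = true ↔
          pvVGet v p.1 p.2 = true ∨ p ∈ new)) ∧
      (gUnm grid (ds.foldl (pvPushStep grid (gH grid) (gW grid) cr cc) (v, rest)).1 +
        ((ds.foldl (pvPushStep grid (gH grid) (gW grid) cr cc) (v, rest)).2).length =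
        gUnm grid v + rest.length) ∧
      (∀ d ∈ ds, gOk grid (cr + d.1, cc + d.2) →
        pvVGet (ds.foldl (pvPushStep grid (gH grid) (gW grid) cr cc) (v, rest)).1
          (cr + d.1) (cc + d.2) = true) := by
  intro ds
  induction ds with
  | nil =>
    intro _ v rest hsh
    exact ⟨[], by simp, hsh, by simp, by simp, by simp, by simp⟩
  | cons d ds ih =>
    intro hds v rest hsh
    rw [List.foldl_cons]
    by_cases hC : 0 ≤ cr + d.1 ∧ cr + d.1 < gH grid ∧ 0 ≤ cc + d.2 ∧ cc + d.2 < gW grid ∧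
        pvVGet v (cr + d.1) (cc + d.2) = false ∧ pvCell grid (cr + d.1) (cc + d.2) ≠ 0
    · obtain ⟨h1, h2, h3, h4, h5, h6⟩ := hC
      have hstep : pvPushStep grid (gH grid) (gW grid) cr cc (v, rest) d =
          (pvVSet v (cr + d.1) (cc + d.2), rest ++ [(cr + d.1, cc + d.2)]) := by
        rw [pvPushStep]
        simp only []
        rw [if_pos ⟨h1, h2, h3, h4, h5, h6⟩]
      rw [hstep]
      have hokq : gOk grid (cr + d.1, cc + d.2) := ⟨h1, h2, h3, h4, h6⟩
      have hsh1 : VShape (pvVSet v (cr + d.1) (cc + d.2)) grid := VShape_pvVSet hsh h1 h3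
      have hrv : (cr + d.1).toNat < v.length := by
        have := hsh.1; rw [gH] at h2; omega
      have hcv : (cc + d.2).toNat < (v.getD (cr + d.1).toNat []).length := by
        rw [row_len hsh hrv]; rw [gW] at h4; omega
      have hget := fun (r' c' : Int) hr' hc' =>
        pvVGet_pvVSet v h1 h3 hr' hc' hrv hcv (r' := r') (c' := c')
      obtain ⟨new, hn1, hn2, hn3, hn4, hn5, hn6⟩ :=
        ih (fun x hx => hds x (List.mem_cons_of_mem _ hx)) _ _ hsh1
      refine ⟨(cr + d.1, cc + d.2) :: new, ?_, hn2, ?_, ?_, ?_, ?_⟩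
      · rw [hn1]; simp
      · intro q hq
        rcases List.mem_cons.1 hq with rfl | hq'
        · exact ⟨hok0, hokq, by
            have hd := hds d List.mem_cons_self
            have : (cr + d.1 - cr, cc + d.2 - cc) = d := by
              apply Prod.ext <;> simp
            rw [this]; exact hd⟩
        · exact hn3 q hq'
      · intro p hp1 hp2
        rw [hn4 p hp1 hp2, hget p.1 p.2 hp1 hp2]
        by_cases hpq : p = (cr + d.1, cc + d.2)
        · subst hpq; simp
        · have : ¬ (p.1 = cr + d.1 ∧ p.2 = cc + d.2) := by
            intro hcon; exact hpq (Prod.ext hcon.1 hcon.2)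
          simp only [this, if_false, List.mem_cons]
          tauto
      · rw [hn5, List.length_append]
        have := gUnm_pvVSet hsh h1 h3 h2 h4 h5
        simp only [List.length_cons, List.length_nil]
        omega
      · intro e he hoke
        rcases List.mem_cons.1 he with rfl | he'
        · refine (hn4 (cr + e.1, cc + e.2) h1 h3).2 (Or.inl ?_)
          rw [hget _ _ h1 h3]
          simp
        · exact hn6 e he' hoke
    · have hstep : pvPushStep grid (gH grid) (gW grid) cr cc (v, rest) d = (v, rest) := by
        rw [pvPushStep]
        simp only []
        rw [if_neg hC]
      rw [hstep]
      obtain ⟨new, hn1, hn2, hn3, hn4, hn5, hn6⟩ :=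
        ih (fun x hx => hds x (List.mem_cons_of_mem _ hx)) v rest hsh
      refine ⟨new, hn1, hn2, hn3, hn4, hn5, ?_⟩
      · intro e he hoke
        rcases List.mem_cons.1 he with rfl | he'
        · obtain ⟨k1, k2, k3, k4, k5⟩ := hoke
          have hv : pvVGet v (cr + e.1) (cc + e.2) = true := by
            by_contra hcon
            exact hC ⟨k1, k2, k3, k4, by simpa using hcon, k5⟩
          rw [hn4 _ k1 k3]
          exact Or.inl hv
        · exact hn6 e he' hoke

lemma pvDfs_spec (grid : List (List Int)) (V0 : Int × Int → Prop) (s : Int × Int)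
    (hs : gOk grid s) :
    ∀ (fuel : Nat) (visited : List (List Bool)) (stack comp : List (Int × Int)),
    VShape visited grid →
    gUnm grid visited + stack.length ≤ fuel →
    (∀ p : Int × Int, 0 ≤ p.1 → 0 ≤ p.2 →
      (pvVGet visited p.1 p.2 = true ↔ V0 p ∨ p ∈ comp ∨ p ∈ stack)) →
    (∀ p ∈ comp, gReach grid s p) → (∀ p ∈ stack, gReach grid s p) →
    (∀ p ∈ comp, ∀ q, gAdj grid p q → pvVGet visited q.1 q.2 = true) →
    VShape (pvDfs grid (gH grid) (gW grid) fuel visited stack comp).1 grid ∧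
    (∀ p : Int × Int, 0 ≤ p.1 → 0 ≤ p.2 →
      (pvVGet (pvDfs grid (gH grid) (gW grid) fuel visited stack comp).1 p.1 p.2 = true ↔
        V0 p ∨ p ∈ (pvDfs grid (gH grid) (gW grid) fuel visited stack comp).2)) ∧
    (∀ p, p ∈ comp ∨ p ∈ stack → p ∈ (pvDfs grid (gH grid) (gW grid) fuel visited stack comp).2) ∧
    (∀ p ∈ (pvDfs grid (gH grid) (gW grid) fuel visited stack comp).2, gReach grid s p) ∧
    (∀ p ∈ (pvDfs grid (gH grid) (gW grid) fuel visited stack comp).2, ∀ q, gAdj grid p q →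
      pvVGet (pvDfs grid (gH grid) (gW grid) fuel visited stack comp).1 q.1 q.2 = true) := by
  intro fuel
  induction fuel with
  | zero =>
    intro visited stack comp hsh hfuel hmk hrc hrs hcl
    have hst : stack = [] := List.length_eq_zero_iff.1 (by omega : stack.length = 0)
    subst hst
    simp only [pvDfs]
    refine ⟨hsh, ?_, ?_, hrc, hcl⟩
    · intro p h1 h2; rw [hmk p h1 h2]; simp
    · intro p hp; rcases hp with h | h
      · exact h
      · cases h
  | succ fuel ih =>
    intro visited stack comp hsh hfuel hmk hrc hrs hcl
    match hlast : stack.getLast? with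
    | none =>
      have hst : stack = [] := List.getLast?_eq_none_iff.1 hlast
      subst hst
      simp only [pvDfs, List.getLast?_nil]
      refine ⟨hsh, ?_, ?_, hrc, hcl⟩
      · intro p h1 h2; rw [hmk p h1 h2]; simp
      · intro p hp; rcases hp with h | h
        · exact h
        · cases h
    | some p0 =>
      obtain ⟨rest, hrest⟩ := List.getLast?_eq_some_iff.1 hlast
      subst hrest
      have hdfs : pvDfs grid (gH grid) (gW grid) (fuel + 1) visited (rest ++ [p0]) comp =
          pvDfs grid (gH grid) (gW grid) fuel
            (pvPush grid (gH grid) (gW grid) p0.1 p0.2 (visited, rest)).1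
            (pvPush grid (gH grid) (gW grid) p0.1 p0.2 (visited, rest)).2
            (comp ++ [p0]) := by
        conv_lhs => rw [pvDfs]
        rw [hlast]
        simp
      rw [hdfs]
      have hp0reach : gReach grid s p0 := hrs p0 (by simp)
      have hp0ok : gOk grid p0 := reach_ok hs hp0reach
      have hok0' : gOk grid (p0.1, p0.2) := by simpa using hp0ok
      obtain ⟨new, hn1, hn2, hn3, hn4, hn5, hn6⟩ :=
        pvPush_fold grid p0.1 p0.2 hok0' pvDeltas (fun d hd => hd) visited rest hsh
      rw [pvPush_eq]
      set st := pvDeltas.foldl (pvPushStep grid (gH grid) (gW grid) p0.1 p0.2) (visited, rest) with hst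
      have hnewreach : ∀ q ∈ new, gReach grid s q := by
        intro q hq
        exact Relation.ReflTransGen.tail hp0reach (by have := hn3 q hq; simpa using this)
      have hfuel' : gUnm grid st.1 + st.2.length ≤ fuel := by
        rw [hn5]
        simp only [List.length_append, List.length_cons, List.length_nil] at hfuel
        omega
      have hmk' : ∀ p : Int × Int, 0 ≤ p.1 → 0 ≤ p.2 →
          (pvVGet st.1 p.1 p.2 = true ↔ V0 p ∨ p ∈ comp ++ [p0] ∨ p ∈ st.2) := by
        intro p h1 h2
        rw [hn4 p h1 h2, hmk p h1 h2, hn1]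
        simp only [List.mem_append, List.mem_cons]
        tauto
      have hrc' : ∀ p ∈ comp ++ [p0], gReach grid s p := by
        intro p hp
        rcases List.mem_append.1 hp with h | h
        · exact hrc p h
        · simp at h; subst h; exact hp0reach
      have hrs' : ∀ p ∈ st.2, gReach grid s p := by
        intro p hp
        rw [hn1] at hp
        rcases List.mem_append.1 hp with h | h
        · exact hrs p (List.mem_append.2 (Or.inl h))
        · exact hnewreach p h
      have hcl' : ∀ p ∈ comp ++ [p0], ∀ q, gAdj grid p q → pvVGet st.1 q.1 q.2 = true := by
        intro p hp q hadj
        have hq1 : 0 ≤ q.1 := hadj.2.1.1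
        have hq2 : 0 ≤ q.2 := hadj.2.1.2.2.1
        rcases List.mem_append.1 hp with h | h
        · exact (hn4 q hq1 hq2).2 (Or.inl (hcl p h q hadj))
        · simp at h
          rw [h] at hadj
          have hd : (q.1 - p0.1, q.2 - p0.2) ∈ pvDeltas := hadj.2.2
          have hqe : (p0.1 + (q.1 - p0.1), p0.2 + (q.2 - p0.2)) = q := by
            apply Prod.ext <;> simp
          have := hn6 (q.1 - p0.1, q.2 - p0.2) hd (by rw [hqe]; exact hadj.2.1)
          simp only at this
          have e1 : p0.1 + (q.1 - p0.1) = q.1 := by ring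
          have e2 : p0.2 + (q.2 - p0.2) = q.2 := by ring
          rw [e1, e2] at this
          exact this
      obtain ⟨c1, c2, c3, c4, c5⟩ := ih st.1 st.2 (comp ++ [p0]) hn2 hfuel' hmk' hrc' hrs' hcl'
      refine ⟨c1, c2, ?_, c4, c5⟩
      intro p hp
      rcases hp with h | h
      · exact c3 p (Or.inl (List.mem_append.2 (Or.inl h)))
      · rcases List.mem_append.1 h with h' | h'
        · exact c3 p (Or.inr (by rw [hn1]; exact List.mem_append.2 (Or.inl h')))
        · simp at h'; subst h'
          exact c3 p (Or.inl (List.mem_append.2 (Or.inr (by simp))))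

lemma pvDfs_run (grid : List (List Int)) (V0 : Int × Int → Prop) (r c : Int)
    (vis : List (List Bool)) (hsh : VShape vis grid)
    (hmk : ∀ p : Int × Int, 0 ≤ p.1 → 0 ≤ p.2 → (pvVGet vis p.1 p.2 = true ↔ V0 p))
    (hV0cl : ∀ p q, V0 p → gAdj grid p q → V0 q)
    (hok : gOk grid (r, c)) (hnew : ¬ V0 (r, c)) :
    VShape (pvDfs grid (gH grid) (gW grid) ((gH grid).toNat * (gW grid).toNat + 1)
      (pvVSet vis r c) [(r, c)] []).1 grid ∧
    (∀ p : Int × Int, 0 ≤ p.1 → 0 ≤ p.2 →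
      (pvVGet (pvDfs grid (gH grid) (gW grid) ((gH grid).toNat * (gW grid).toNat + 1)
        (pvVSet vis r c) [(r, c)] []).1 p.1 p.2 = true ↔ V0 p ∨ gReach grid (r, c) p)) ∧
    (∀ p, p ∈ (pvDfs grid (gH grid) (gW grid) ((gH grid).toNat * (gW grid).toNat + 1)
      (pvVSet vis r c) [(r, c)] []).2 ↔ gReach grid (r, c) p) := by
  have hr : 0 ≤ r := hok.1
  have hc : 0 ≤ c := hok.2.2.1
  have hrh : r < gH grid := hok.2.1
  have hcw : c < gW grid := hok.2.2.2.1
  have hv := hsh.1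
  have hrv : r.toNat < vis.length := by rw [gH] at hrh; omega
  have hcv : c.toNat < (vis.getD r.toNat []).length := by
    rw [row_len hsh hrv]; rw [gW] at hcw; omega
  have hunm : pvVGet vis r c = false := by
    have := hmk (r, c) hr hc
    simp only at this
    cases hgv : pvVGet vis r c
    · rfl
    · exact absurd (this.1 hgv) hnew
  have hsh1 : VShape (pvVSet vis r c) grid := VShape_pvVSet hsh hr hc
  have hfuel : gUnm grid (pvVSet vis r c) + ([(r, c)] : List (Int × Int)).length ≤
      (gH grid).toNat * (gW grid).toNat + 1 := by
    have h1 := gUnm_pvVSet hsh hr hc hrh hcw hunm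
    have h2 := gUnm_le grid vis
    simp only [List.length_cons, List.length_nil]
    omega
  have hmk1 : ∀ p : Int × Int, 0 ≤ p.1 → 0 ≤ p.2 →
      (pvVGet (pvVSet vis r c) p.1 p.2 = true ↔ V0 p ∨ p ∈ ([] : List (Int × Int)) ∨ p ∈ [(r, c)]) := by
    intro p h1 h2
    rw [pvVGet_pvVSet vis hr hc h1 h2 hrv hcv]
    by_cases hpq : p = (r, c)
    · subst hpq; simp
    · have hne : ¬ (p.1 = r ∧ p.2 = c) := by
        intro hcon; exact hpq (Prod.ext hcon.1 hcon.2)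
      rw [if_neg hne, hmk p h1 h2]
      simp [hpq]
  obtain ⟨c1, c2, c3, c4, c5⟩ := pvDfs_spec grid V0 (r, c) hok
    ((gH grid).toNat * (gW grid).toNat + 1) (pvVSet vis r c) [(r, c)] []
    hsh1 hfuel hmk1 (by simp)
    (by intro p hp; simp at hp; subst hp; exact Relation.ReflTransGen.refl) (by simp)
  have hcomp : ∀ p, p ∈ (pvDfs grid (gH grid) (gW grid) ((gH grid).toNat * (gW grid).toNat + 1)
      (pvVSet vis r c) [(r, c)] []).2 ↔ gReach grid (r, c) p := by
    intro p
    constructor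
    · exact c4 p
    · intro hre
      induction hre with
      | refl => exact c3 (r, c) (Or.inr (by simp))
      | @tail b' q' hstep hadj ihh =>
        have hq1 : 0 ≤ q'.1 := hadj.2.1.1
        have hq2 : 0 ≤ q'.2 := hadj.2.1.2.2.1
        have hmkq := (c2 q' hq1 hq2).1 (c5 b' ihh q' hadj)
        rcases hmkq with h | h
        · exact absurd h (reach_not_V0 hV0cl hnew (Relation.ReflTransGen.tail hstep hadj))
        · exact h
  refine ⟨c1, ?_, hcomp⟩
  intro p h1 h2
  rw [c2 p h1 h2, hcomp p]

lemma min?_congr {l1 l2 : List Int} (hmem : ∀ x, x ∈ l1 ↔ x ∈ l2) (hne : l1 ≠ []) :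
    PySem.List.min? l1 (fun x => x) = PySem.List.min? l2 (fun x => x) := by
  have hne2 : l2 ≠ [] := by
    intro h
    subst h
    obtain ⟨x, hx⟩ := List.exists_mem_of_ne_nil l1 hne
    exact absurd ((hmem x).1 hx) (by simp)
  cases h1 : PySem.List.min? l1 (fun x => x) with
  | none => exact absurd ((PySem.List.min?_eq_none_iff l1 _).1 h1) hne
  | some m1 =>
    cases h2 : PySem.List.min? l2 (fun x => x) with
    | none => exact absurd ((PySem.List.min?_eq_none_iff l2 _).1 h2) hne2
    | some m2 =>
      have hm1 : m1 ∈ l1 := PySem.List.min?_mem h1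
      have hm2 : m2 ∈ l2 := PySem.List.min?_mem h2
      have hle1 := PySem.List.min?_isMin h1 m2 ((hmem m2).2 hm2)
      have hle2 := PySem.List.min?_isMin h2 m1 ((hmem m1).1 hm1)
      simp only [Option.some.injEq]
      omega

lemma max?_congr {l1 l2 : List Int} (hmem : ∀ x, x ∈ l1 ↔ x ∈ l2) (hne : l1 ≠ []) :
    PySem.List.max? l1 (fun x => x) = PySem.List.max? l2 (fun x => x) := by
  have hne2 : l2 ≠ [] := by
    intro h
    subst h
    obtain ⟨x, hx⟩ := List.exists_mem_of_ne_nil l1 hne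
    exact absurd ((hmem x).1 hx) (by simp)
  cases h1 : PySem.List.max? l1 (fun x => x) with
  | none => exact absurd ((PySem.List.max?_eq_none_iff l1 _).1 h1) hne
  | some m1 =>
    cases h2 : PySem.List.max? l2 (fun x => x) with
    | none => exact absurd ((PySem.List.max?_eq_none_iff l2 _).1 h2) hne2
    | some m2 =>
      have hm1 : m1 ∈ l1 := PySem.List.max?_mem h1
      have hm2 : m2 ∈ l2 := PySem.List.max?_mem h2
      have hle1 := PySem.List.max?_isMax h1 m2 ((hmem m2).2 hm2)
      have hle2 := PySem.List.max?_isMax h2 m1 ((hmem m1).1 hm1)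
      simp only [Option.some.injEq]
      omega

def pvR0 (l : List (Int × Int)) : Int := (PySem.List.min? (l.map (·.1)) (fun x => x)).getD 0
def pvR1 (l : List (Int × Int)) : Int := (PySem.List.max? (l.map (·.1)) (fun x => x)).getD 0
def pvC0 (l : List (Int × Int)) : Int := (PySem.List.min? (l.map (·.2)) (fun x => x)).getD 0
def pvC1 (l : List (Int × Int)) : Int := (PySem.List.max? (l.map (·.2)) (fun x => x)).getD 0
def pvCand (grid : List (List Int)) (l : List (Int × Int)) : Int × Int × Int × Int × Int :=
  (((pvColors grid (pvR0 l) (pvR1 l) (pvC0 l) (pvC1 l)).length : Int),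
    pvR0 l, pvR1 l, pvC0 l, pvC1 l)

def pvSub (grid : List (List Int)) (t : Int × Int × Int × Int × Int) : List (List Int) :=
  (PySem.List.pyRange t.2.1 (t.2.2.1 + 1) 1).map (fun rr =>
    PySem.List.slice (PySem.List.pyGetD grid rr []) (some t.2.2.2.1) (some (t.2.2.2.2 + 1)))

def pvSelStep (grid : List (List Int)) (acc : List (List Int) × Int)
    (t : Int × Int × Int × Int × Int) : List (List Int) × Int :=
  if t.1 > acc.2 then (pvSub grid t, t.1) else acc

lemma map_mem_congr {l1 l2 : List (Int × Int)} (f : Int × Int → Int)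
    (h : ∀ p, p ∈ l1 ↔ p ∈ l2) : ∀ x, x ∈ l1.map f ↔ x ∈ l2.map f := by
  intro x
  simp only [List.mem_map]
  constructor
  · rintro ⟨p, hp, rfl⟩; exact ⟨p, (h p).1 hp, rfl⟩
  · rintro ⟨p, hp, rfl⟩; exact ⟨p, (h p).2 hp, rfl⟩

lemma pvCand_congr (grid : List (List Int)) {l1 l2 : List (Int × Int)}
    (h : ∀ p, p ∈ l1 ↔ p ∈ l2) (hne : l1 ≠ []) : pvCand grid l1 = pvCand grid l2 := by
  have hne1 : l1.map (fun p : Int × Int => p.1) ≠ [] := by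
    simp only [ne_eq, List.map_eq_nil_iff]; exact hne
  have hne2 : l1.map (fun p : Int × Int => p.2) ≠ [] := by
    simp only [ne_eq, List.map_eq_nil_iff]; exact hne
  have e1 : pvR0 l1 = pvR0 l2 := by
    rw [pvR0, pvR0, min?_congr (map_mem_congr _ h) hne1]
  have e2 : pvR1 l1 = pvR1 l2 := by
    rw [pvR1, pvR1, max?_congr (map_mem_congr _ h) hne1]
  have e3 : pvC0 l1 = pvC0 l2 := by
    rw [pvC0, pvC0, min?_congr (map_mem_congr _ h) hne2]
  have e4 : pvC1 l1 = pvC1 l2 := by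
    rw [pvC1, pvC1, max?_congr (map_mem_congr _ h) hne2]
  rw [pvCand, pvCand, e1, e2, e3, e4]

-- flat row-major indexing and the scan order both ports follow
def idxI (grid : List (List Int)) (p : Int × Int) : Int := p.1 * gW grid + p.2
def cellI (grid : List (List Int)) (i : Int) : Int × Int := (i / gW grid, i % gW grid)
def LL (grid : List (List Int)) : List (Int × Int) :=
  (PySem.List.pyRange 0 (gH grid * gW grid) 1).map (cellI grid)

lemma idxI_cellI (grid : List (List Int)) (hW : 0 < gW grid) (i : Int) :
    idxI grid (cellI grid i) = i := by
  rw [idxI, cellI]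
  simp only
  rw [Int.ediv_add_emod' i (gW grid)]

lemma cellI_idxI (grid : List (List Int)) (hW : 0 < gW grid) {p : Int × Int}
    (h2 : 0 ≤ p.2) (h3 : p.2 < gW grid) : cellI grid (idxI grid p) = p := by
  rw [idxI, cellI]
  have he : (p.1 * gW grid + p.2) / gW grid = p.1 := by
    rw [add_comm, Int.add_mul_ediv_right _ _ (by omega : gW grid ≠ 0),
      Int.ediv_eq_zero_of_lt h2 h3]
    omega
  have hm : (p.1 * gW grid + p.2) % gW grid = p.2 := by
    rw [add_comm, Int.add_mul_emod_self_right, Int.emod_eq_of_lt h2 h3]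
  rw [he, hm]

lemma idxI_bounds (grid : List (List Int)) (hW : 0 < gW grid) {p : Int × Int}
    (h : 0 ≤ p.1 ∧ p.1 < gH grid ∧ 0 ≤ p.2 ∧ p.2 < gW grid) :
    0 ≤ idxI grid p ∧ idxI grid p < gH grid * gW grid := by
  obtain ⟨h1, h2, h3, h4⟩ := h
  constructor
  · have := mul_nonneg h1 (le_of_lt hW)
    rw [idxI]; omega
  · have hle : (p.1 + 1) * gW grid ≤ gH grid * gW grid :=
      mul_le_mul_of_nonneg_right (by omega) (le_of_lt hW)
    rw [idxI]
    nlinarith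

lemma cellI_bounds (grid : List (List Int)) (hW : 0 < gW grid) {i : Int}
    (h0 : 0 ≤ i) (h1 : i < gH grid * gW grid) :
    0 ≤ (cellI grid i).1 ∧ (cellI grid i).1 < gH grid ∧
      0 ≤ (cellI grid i).2 ∧ (cellI grid i).2 < gW grid := by
  rw [cellI]
  refine ⟨Int.ediv_nonneg h0 (le_of_lt hW), ?_, Int.emod_nonneg i (by omega), Int.emod_lt_of_pos i hW⟩
  rw [Int.ediv_lt_iff_lt_mul hW]
  nlinarith [mul_comm (gH grid) (gW grid)]

lemma mem_LL_iff (grid : List (List Int)) (hW : 0 < gW grid) (p : Int × Int) :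
    p ∈ LL grid ↔ 0 ≤ p.1 ∧ p.1 < gH grid ∧ 0 ≤ p.2 ∧ p.2 < gW grid := by
  rw [LL, List.mem_map]
  constructor
  · rintro ⟨i, hi, rfl⟩
    rw [PySem.List.mem_pyRange_one] at hi
    exact cellI_bounds grid hW hi.1 hi.2
  · intro h
    refine ⟨idxI grid p, ?_, cellI_idxI grid hW h.2.2.1 h.2.2.2⟩
    rw [PySem.List.mem_pyRange_one]
    exact idxI_bounds grid hW h

lemma pairwise_LL (grid : List (List Int)) (hW : 0 < gW grid) :
    (LL grid).Pairwise (fun p q => idxI grid p < idxI grid q) := by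
  rw [LL, List.pairwise_map, List.pairwise_iff_getElem]
  intro a b ha hb hab
  rw [PySem.List.length_pyRange_one] at ha hb
  rw [PySem.List.getElem_pyRange_one _ _ _ (by rw [PySem.List.length_pyRange_one]; omega),
    PySem.List.getElem_pyRange_one _ _ _ (by rw [PySem.List.length_pyRange_one]; omega),
    idxI_cellI grid hW, idxI_cellI grid hW]
  omega

lemma idxI_inj (grid : List (List Int)) (hW : 0 < gW grid) {p q : Int × Int}
    (hp2 : 0 ≤ p.2) (hp3 : p.2 < gW grid) (hq2 : 0 ≤ q.2) (hq3 : q.2 < gW grid)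
    (h : idxI grid p = idxI grid q) : p = q := by
  have := cellI_idxI grid hW hp2 hp3
  rw [h, cellI_idxI grid hW hq2 hq3] at this
  exact this.symm

-- facts about any split of the scan order
lemma LL_split_lt (grid : List (List Int)) (hW : 0 < gW grid) {l1 l2 : List (Int × Int)}
    {p : Int × Int} (h : LL grid = l1 ++ p :: l2) :
    (∀ q ∈ l1, idxI grid q < idxI grid p) ∧ (∀ q ∈ l2, idxI grid p < idxI grid q) := by
  have hpw := pairwise_LL grid hW
  rw [h, List.pairwise_append] at hpw
  obtain ⟨_, hpw2, hcr⟩ := hpw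
  rw [List.pairwise_cons] at hpw2
  exact ⟨fun q hq => hcr q hq p List.mem_cons_self, hpw2.1⟩

lemma LL_split_not_mem (grid : List (List Int)) (hW : 0 < gW grid) {l1 l2 : List (Int × Int)}
    {p : Int × Int} (h : LL grid = l1 ++ p :: l2) : p ∉ l1 := by
  intro hmem
  have := (LL_split_lt grid hW h).1 p hmem
  omega

lemma LL_split_mem_l1 (grid : List (List Int)) (hW : 0 < gW grid) {l1 l2 : List (Int × Int)}
    {p q : Int × Int} (h : LL grid = l1 ++ p :: l2)
    (hq : q ∈ LL grid) (hlt : idxI grid q < idxI grid p) : q ∈ l1 := by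
  rw [h] at hq
  rcases List.mem_append.1 hq with hmem | hmem
  · exact hmem
  · rcases List.mem_cons.1 hmem with rfl | hmem
    · omega
    · have := (LL_split_lt grid hW h).2 q hmem
      omega

-- converting the ports' nested row/column loops into one fold over the scan order LL
lemma pyRange_chunk (grid : List (List Int)) (hW : 0 < gW grid) (n : Nat) :
    (PySem.List.pyRange ((n : Int) * gW grid) ((n : Int) * gW grid + gW grid) 1).map (cellI grid)
      = (PySem.List.pyRange 0 (gW grid) 1).map (fun c => ((n : Int), c)) := by
  apply List.ext_getElem
  · simp only [List.length_map, PySem.List.length_pyRange_one]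
    omega
  · intro k h1 h2
    simp only [List.length_map, PySem.List.length_pyRange_one] at h1
    simp only [List.getElem_map]
    rw [PySem.List.getElem_pyRange_one _ _ _ (by rw [PySem.List.length_pyRange_one]; omega),
      PySem.List.getElem_pyRange_one _ _ _ (by rw [PySem.List.length_pyRange_one]; omega)]
    have hk0 : (0 : Int) ≤ (k : Int) := by positivity
    have hkW : (k : Int) < gW grid := by omega
    rw [cellI]
    apply Prod.ext
    · show ((n : Int) * gW grid + (k : Int)) / gW grid = (n : Int)
      rw [add_comm, Int.add_mul_ediv_right _ _ (by omega : gW grid ≠ 0),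
        Int.ediv_eq_zero_of_lt hk0 hkW]
      omega
    · show ((n : Int) * gW grid + (k : Int)) % gW grid = 0 + (k : Int)
      rw [add_comm, Int.add_mul_emod_self_right, Int.emod_eq_of_lt hk0 hkW]
      omega

lemma flatMap_rows (grid : List (List Int)) (hW : 0 < gW grid) : ∀ n : Nat,
    ((PySem.List.pyRange 0 (n : Int) 1).flatMap
        (fun r => (PySem.List.pyRange 0 (gW grid) 1).map (fun c => (r, c))))
      = (PySem.List.pyRange 0 ((n : Int) * gW grid) 1).map (cellI grid) := by
  intro n
  induction n with
  | zero =>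
    have h1 : PySem.List.pyRange 0 ((0 : Int)) 1 = [] := by
      apply List.eq_nil_of_length_eq_zero
      rw [PySem.List.length_pyRange_one]
      simp
    have h2 : PySem.List.pyRange 0 (((0 : Nat) : Int) * gW grid) 1 = [] := by
      apply List.eq_nil_of_length_eq_zero
      rw [PySem.List.length_pyRange_one]
      simp
    rw [h2]
    simp [h1]
  | succ n ih =>
    have hc : ((n + 1 : Nat) : Int) = (n : Int) + 1 := by push_cast; ring
    rw [hc, PySem.List.pyRange_one_succ_right (by positivity : (0 : Int) ≤ (n : Int)),
      List.flatMap_append, ih]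
    have hc2 : ((n : Int) + 1) * gW grid = (n : Int) * gW grid + gW grid := by ring
    rw [hc2, PySem.List.pyRange_one_append 0 ((n : Int) * gW grid) ((n : Int) * gW grid + gW grid)
      (by positivity) (by omega), List.map_append, pyRange_chunk grid hW n]
    simp

lemma nested_fold_eq {β : Type} (grid : List (List Int)) (hW : 0 < gW grid)
    (f : β → Int × Int → β) (init : β) :
    (PySem.List.pyRange 0 (gH grid) 1).foldl (fun st r =>
      (PySem.List.pyRange 0 (gW grid) 1).foldl (fun st c => f st (r, c)) st) init
      = (LL grid).foldl f init := by
  have h1 : ∀ (st : β) (r : Int),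
      (PySem.List.pyRange 0 (gW grid) 1).foldl (fun st c => f st (r, c)) st
        = List.foldl f st ((PySem.List.pyRange 0 (gW grid) 1).map (fun c => (r, c))) := by
    intro st r
    rw [List.foldl_map]
  calc (PySem.List.pyRange 0 (gH grid) 1).foldl (fun st r =>
      (PySem.List.pyRange 0 (gW grid) 1).foldl (fun st c => f st (r, c)) st) init
      = (PySem.List.pyRange 0 (gH grid) 1).foldl (fun st r =>
          List.foldl f st ((PySem.List.pyRange 0 (gW grid) 1).map (fun c => (r, c)))) init := by
        simp only [h1]
    _ = List.foldl f init ((PySem.List.pyRange 0 (gH grid) 1).flatMap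
          (fun r => (PySem.List.pyRange 0 (gW grid) 1).map (fun c => (r, c)))) := by
        rw [List.foldl_flatMap]
    _ = (LL grid).foldl f init := by
        have hH : ((gH grid).toNat : Int) = gH grid := by rw [gH]; simp
        rw [← hH, flatMap_rows grid hW, LL, hH]

-- the component minima and component member lists (proof-side abstractions)
def isMin (grid : List (List Int)) (s : Int × Int) : Prop :=
  gOk grid s ∧ ∀ q, gReach grid s q → idxI grid s ≤ idxI grid q

noncomputable def minsIn (grid : List (List Int)) (l : List (Int × Int)) : List (Int × Int) :=
  l.filter (fun s => @decide (isMin grid s) (Classical.propDecidable _))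

noncomputable def classIn (grid : List (List Int)) (l : List (Int × Int)) (s : Int × Int) :
    List (Int × Int) :=
  l.filter (fun p => @decide (gReach grid s p) (Classical.propDecidable _))

lemma mem_minsIn (grid : List (List Int)) (l : List (Int × Int)) (q : Int × Int) :
    q ∈ minsIn grid l ↔ q ∈ l ∧ isMin grid q := by
  rw [minsIn, List.mem_filter]
  constructor
  · rintro ⟨h1, h2⟩; exact ⟨h1, @of_decide_eq_true _ (Classical.propDecidable _) h2⟩
  · rintro ⟨h1, h2⟩; exact ⟨h1, @decide_eq_true _ (Classical.propDecidable _) h2⟩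

lemma mem_classIn (grid : List (List Int)) (l : List (Int × Int)) (s q : Int × Int) :
    q ∈ classIn grid l s ↔ q ∈ l ∧ gReach grid s q := by
  rw [classIn, List.mem_filter]
  constructor
  · rintro ⟨h1, h2⟩; exact ⟨h1, @of_decide_eq_true _ (Classical.propDecidable _) h2⟩
  · rintro ⟨h1, h2⟩; exact ⟨h1, @decide_eq_true _ (Classical.propDecidable _) h2⟩

lemma ok_mem_LL (grid : List (List Int)) (hW : 0 < gW grid) {p : Int × Int}
    (h : gOk grid p) : p ∈ LL grid := by
  rw [mem_LL_iff grid hW]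
  exact ⟨h.1, h.2.1, h.2.2.1, h.2.2.2.1⟩

lemma mem_classIn_LL (grid : List (List Int)) (hW : 0 < gW grid) {s : Int × Int}
    (hs : gOk grid s) (q : Int × Int) :
    q ∈ classIn grid (LL grid) s ↔ gReach grid s q := by
  rw [mem_classIn]
  constructor
  · exact fun h => h.2
  · intro h
    exact ⟨ok_mem_LL grid hW (reach_ok hs h), h⟩

lemma minsIn_append_pos (grid : List (List Int)) (l : List (Int × Int)) {p : Int × Int}
    (h : isMin grid p) : minsIn grid (l ++ [p]) = minsIn grid l ++ [p] := by
  rw [minsIn, List.filter_append, minsIn, List.filter_singleton]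
  simp only [@decide_eq_true _ (Classical.propDecidable _) h, cond_true]

lemma minsIn_append_neg (grid : List (List Int)) (l : List (Int × Int)) {p : Int × Int}
    (h : ¬ isMin grid p) : minsIn grid (l ++ [p]) = minsIn grid l := by
  rw [minsIn, List.filter_append, minsIn, List.filter_singleton]
  simp only [@decide_eq_false _ (Classical.propDecidable _) h, cond_false, List.append_nil]

lemma classIn_append_pos (grid : List (List Int)) (l : List (Int × Int)) {s p : Int × Int}
    (h : gReach grid s p) : classIn grid (l ++ [p]) s = classIn grid l s ++ [p] := by
  rw [classIn, List.filter_append, classIn, List.filter_singleton]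
  simp only [@decide_eq_true _ (Classical.propDecidable _) h, cond_true]

lemma classIn_append_neg (grid : List (List Int)) (l : List (Int × Int)) {s p : Int × Int}
    (h : ¬ gReach grid s p) : classIn grid (l ++ [p]) s = classIn grid l s := by
  rw [classIn, List.filter_append, classIn, List.filter_singleton]
  simp only [@decide_eq_false _ (Classical.propDecidable _) h, cond_false, List.append_nil]

lemma minExists (grid : List (List Int)) (hW : 0 < gW grid) :
    ∀ p, gOk grid p → ∃ m, isMin grid m ∧ gReach grid p m := by
  have key : ∀ n : Nat, ∀ p, gOk grid p → (idxI grid p).toNat = n →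
      ∃ m, isMin grid m ∧ gReach grid p m := by
    intro n
    induction n using Nat.strong_induction_on with
    | _ n ih =>
      intro p hok hn
      by_cases hmin : isMin grid p
      · exact ⟨p, hmin, Relation.ReflTransGen.refl⟩
      · have : ∃ q, gReach grid p q ∧ idxI grid q < idxI grid p := by
          by_contra hcon
          push_neg at hcon
          exact hmin ⟨hok, fun q hq => hcon q hq⟩
        obtain ⟨q, hq1, hq2⟩ := this
        have hqok : gOk grid q := reach_ok hok hq1
        have hq0 : 0 ≤ idxI grid q :=
          (idxI_bounds grid hW ⟨hqok.1, hqok.2.1, hqok.2.2.1, hqok.2.2.2.1⟩).1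
        obtain ⟨m, hm1, hm2⟩ := ih (idxI grid q).toNat (by omega) q hqok rfl
        exact ⟨m, hm1, Relation.ReflTransGen.trans hq1 hm2⟩
  exact fun p hok => key (idxI grid p).toNat p hok rfl

lemma minUnique (grid : List (List Int)) (hW : 0 < gW grid) {s s' : Int × Int}
    (h1 : isMin grid s) (h2 : isMin grid s') (hr : gReach grid s s') : s = s' := by
  have e1 : idxI grid s ≤ idxI grid s' := h1.2 s' hr
  have e2 : idxI grid s' ≤ idxI grid s := h2.2 s (gReach_symm hr)
  exact idxI_inj grid hW h1.1.2.2.1 h1.1.2.2.2.1 h2.1.2.2.1 h2.1.2.2.2.1 (by omega)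

-- the common abstraction both ports are reduced to: the components in scan order,
-- each as (distinct colors in bbox, bbox), folded through the strict-improvement selection
noncomputable def candList (grid : List (List Int)) (l : List (Int × Int)) :
    List (Int × Int × Int × Int × Int) :=
  (minsIn grid l).map (fun s => pvCand grid (classIn grid (LL grid) s))

def InvA (grid : List (List Int)) (l1 : List (Int × Int))
    (st : List (List Bool) × List (List Int) × Int) : Prop :=
  VShape st.1 grid ∧
  (∀ p : Int × Int, 0 ≤ p.1 → 0 ≤ p.2 →
    (pvVGet st.1 p.1 p.2 = true ↔ ∃ s ∈ l1, isMin grid s ∧ gReach grid s p)) ∧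
  st.2 = (candList grid l1).foldl (pvSelStep grid) (grid, -1)

lemma stepA_preserve (grid : List (List Int)) (hW : 0 < gW grid)
    {l1 l2 : List (Int × Int)} {p : Int × Int} (hsplit : LL grid = l1 ++ p :: l2)
    {st : List (List Bool) × List (List Int) × Int} (hInv : InvA grid l1 st) :
    InvA grid (l1 ++ [p]) (pvStepA grid (gH grid) (gW grid) st p.1 p.2) := by
  obtain ⟨hsh, hmk, hsel⟩ := hInv
  have hpL : p ∈ LL grid := by rw [hsplit]; simp
  have hpb := (mem_LL_iff grid hW p).1 hpL
  have hV0cl : ∀ a b, (∃ s ∈ l1, isMin grid s ∧ gReach grid s a) → gAdj grid a b →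
      (∃ s ∈ l1, isMin grid s ∧ gReach grid s b) := by
    rintro a b ⟨s, hs1, hs2, hs3⟩ hadj
    exact ⟨s, hs1, hs2, hs3.tail hadj⟩
  by_cases hz : pvCell grid p.1 p.2 ≠ 0
  · have hok : gOk grid p := ⟨hpb.1, hpb.2.1, hpb.2.2.1, hpb.2.2.2, hz⟩
    by_cases hvis : pvVGet st.1 p.1 p.2 = false
    · -- fresh nonzero cell: A discovers the component; p must be its scan-order minimum
      have hnV0 : ¬ (∃ s ∈ l1, isMin grid s ∧ gReach grid s p) := by
        intro hv
        have := (hmk p hpb.1 hpb.2.2.1).2 hv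
        simp [hvis] at this
      have hpmin : isMin grid p := by
        obtain ⟨m, hm, hrm⟩ := minExists grid hW p hok
        by_cases him : idxI grid m < idxI grid p
        · have hmL : m ∈ LL grid := ok_mem_LL grid hW hm.1
          have hml1 : m ∈ l1 := LL_split_mem_l1 grid hW hsplit hmL him
          exact absurd ⟨m, hml1, hm, gReach_symm hrm⟩ hnV0
        · have h1 : idxI grid m ≤ idxI grid p := hm.2 p (gReach_symm hrm)
          have : m = p := idxI_inj grid hW hm.1.2.2.1 hm.1.2.2.2.1 hok.2.2.1 hok.2.2.2.1 (by omega)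
          rwa [← this]
      obtain ⟨d1, d2, d3⟩ := pvDfs_run grid (fun q => ∃ s ∈ l1, isMin grid s ∧ gReach grid s q)
        p.1 p.2 st.1 hsh (fun q h1 h2 => hmk q h1 h2) hV0cl hok hnV0
      set D := pvDfs grid (gH grid) (gW grid) ((gH grid).toNat * (gW grid).toNat + 1)
        (pvVSet st.1 p.1 p.2) [(p.1, p.2)] [] with hD
      have hstep : pvStepA grid (gH grid) (gW grid) st p.1 p.2 =
          (D.1, pvSelStep grid st.2 (pvCand grid D.2)) := by
        rw [pvStepA]
        simp only []
        rw [if_pos ⟨hz, hvis⟩]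
        simp only [pvSelStep, pvCand, pvSub, pvR0, pvR1, pvC0, pvC1]
        split_ifs with hgt
        · rfl
        · rfl
      rw [hstep]
      refine ⟨d1, ?_, ?_⟩
      · intro q h1 h2
        rw [d2 q h1 h2]
        constructor
        · rintro (⟨s, hs1, hs2, hs3⟩ | hre)
          · exact ⟨s, List.mem_append.2 (Or.inl hs1), hs2, hs3⟩
          · exact ⟨p, List.mem_append.2 (Or.inr (by simp)), hpmin, hre⟩
        · rintro ⟨s, hs1, hs2, hs3⟩
          rcases List.mem_append.1 hs1 with h | h
          · exact Or.inl ⟨s, h, hs2, hs3⟩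
          · simp only [List.mem_singleton] at h
            subst h
            exact Or.inr hs3
      · show pvSelStep grid st.2 (pvCand grid D.2) =
          (candList grid (l1 ++ [p])).foldl (pvSelStep grid) (grid, -1)
        rw [candList, minsIn_append_pos grid l1 hpmin, List.map_append, List.foldl_append]
        simp only [List.map_cons, List.map_nil, List.foldl_cons, List.foldl_nil]
        rw [hsel, candList]
        congr 1
        apply pvCand_congr
        · intro x
          rw [d3 x, mem_classIn_LL grid hW hok]
        · intro hnil
          have := (d3 (p.1, p.2)).2 Relation.ReflTransGen.refl
          rw [hnil] at this
          cases this
    · -- already visited: A skips; p cannot be a component minimum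
      have hvt : pvVGet st.1 p.1 p.2 = true := by
        cases h : pvVGet st.1 p.1 p.2
        · exact absurd h hvis
        · rfl
      have hnmin : ¬ isMin grid p := by
        intro hpm
        obtain ⟨s, hsl1, hsmin, hsreach⟩ := (hmk p hpb.1 hpb.2.2.1).1 hvt
        have : s = p := minUnique grid hW hsmin hpm hsreach
        exact LL_split_not_mem grid hW hsplit (this ▸ hsl1)
      have hstep : pvStepA grid (gH grid) (gW grid) st p.1 p.2 = st := by
        rw [pvStepA]
        simp only []
        rw [if_neg (by rw [hvt]; simp)]
      rw [hstep]
      refine ⟨hsh, ?_, ?_⟩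
      · intro q h1 h2
        rw [hmk q h1 h2]
        constructor
        · rintro ⟨s, hs1, hs2, hs3⟩
          exact ⟨s, List.mem_append.2 (Or.inl hs1), hs2, hs3⟩
        · rintro ⟨s, hs1, hs2, hs3⟩
          rcases List.mem_append.1 hs1 with h | h
          · exact ⟨s, h, hs2, hs3⟩
          · simp only [List.mem_singleton] at h
            subst h
            exact absurd hs2 hnmin
      · rw [hsel, candList, candList, minsIn_append_neg grid l1 hnmin]
  · -- zero cell: A skips; p is not ok, hence not a minimum and reached by nothing
    push_neg at hz
    have hnmin : ¬ isMin grid p := by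
      intro hpm
      exact hpm.1.2.2.2.2 hz
    have hstep : pvStepA grid (gH grid) (gW grid) st p.1 p.2 = st := by
      rw [pvStepA]
      simp only []
      rw [if_neg (by rw [hz]; simp)]
    rw [hstep]
    refine ⟨hsh, ?_, ?_⟩
    · intro q h1 h2
      rw [hmk q h1 h2]
      constructor
      · rintro ⟨s, hs1, hs2, hs3⟩
        exact ⟨s, List.mem_append.2 (Or.inl hs1), hs2, hs3⟩
      · rintro ⟨s, hs1, hs2, hs3⟩
        rcases List.mem_append.1 hs1 with h | h
        · exact ⟨s, h, hs2, hs3⟩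
        · simp only [List.mem_singleton] at h
          subst h
          exact absurd hs2 hnmin
    · rw [hsel, candList, candList, minsIn_append_neg grid l1 hnmin]

lemma foldA (grid : List (List Int)) (hW : 0 < gW grid) :
    ∀ (l2 l1 : List (Int × Int)) (st : List (List Bool) × List (List Int) × Int),
    LL grid = l1 ++ l2 → InvA grid l1 st →
    InvA grid (l1 ++ l2)
      (l2.foldl (fun st (p : Int × Int) => pvStepA grid (gH grid) (gW grid) st p.1 p.2) st) := by
  intro l2
  induction l2 with
  | nil =>
    intro l1 st h hInv
    simpa using hInv
  | cons p l2 ih =>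
    intro l1 st h hInv
    rw [List.foldl_cons]
    have h2 : LL grid = (l1 ++ [p]) ++ l2 := by rw [h]; simp
    have := ih (l1 ++ [p]) _ h2 (stepA_preserve grid hW h hInv)
    simpa using this

lemma getD_mem_or_default {α : Type} (l : List α) (n : Nat) (d : α) :
    l.getD n d ∈ l ∨ l.getD n d = d := by
  rw [List.getD_eq_getElem?_getD]
  cases h : l[n]? with
  | none => simp
  | some a =>
    left
    simp only [Option.getD_some]
    exact List.mem_of_getElem? h

lemma vis0_shape (grid : List (List Int)) :
    VShape ((PySem.List.pyRange 0 (grid.length : Int) 1).map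
      (fun _ => PySem.List.pyRepeat [false] ((grid.headD []).length : Int))) grid := by
  constructor
  · rw [List.length_map, PySem.List.length_pyRange_one]
    omega
  · intro row hrow
    obtain ⟨_, _, rfl⟩ := List.mem_map.1 hrow
    rw [PySem.List.pyRepeat_singleton, List.length_replicate]
    omega

lemma vis0_false (grid : List (List Int)) (p : Int × Int) (h1 : 0 ≤ p.1) (h2 : 0 ≤ p.2) :
    pvVGet ((PySem.List.pyRange 0 (grid.length : Int) 1).map
      (fun _ => PySem.List.pyRepeat [false] ((grid.headD []).length : Int))) p.1 p.2 = false := by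
  cases hget : pvVGet ((PySem.List.pyRange 0 (grid.length : Int) 1).map
      (fun _ => PySem.List.pyRepeat [false] ((grid.headD []).length : Int))) p.1 p.2
  · rfl
  exfalso
  rw [pvVGet_nonneg _ h1 h2] at hget
  set vis0 := (PySem.List.pyRange 0 (grid.length : Int) 1).map
      (fun _ => PySem.List.pyRepeat [false] ((grid.headD []).length : Int)) with hv0
  have hrow : ∀ row ∈ vis0, ∀ x ∈ row, x = false := by
    intro row hrow x hx
    obtain ⟨_, _, rfl⟩ := List.mem_map.1 hrow
    rw [PySem.List.pyRepeat_singleton] at hx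
    exact List.eq_of_mem_replicate hx
  rcases getD_mem_or_default vis0 p.1.toNat [] with h | h
  · rcases getD_mem_or_default (vis0.getD p.1.toNat []) p.2.toNat false with h' | h'
    · exact absurd hget (by rw [hrow _ h _ h']; simp)
    · rw [h'] at hget; cases hget
  · rw [h] at hget
    simp only [List.getD_nil] at hget
    cases hget

-- ===== B phase 1: union-find =====
def pGet (parent : List Int) (i : Int) : Int := PySem.List.pyGetD parent i 0

def PInv (grid : List (List Int)) (parent : List Int) : Prop :=
  parent.length = (gH grid * gW grid).toNat ∧
  (∀ i : Int, 0 ≤ i → i < gH grid * gW grid →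
    0 ≤ pGet parent i ∧ pGet parent i ≤ i ∧
    (pGet parent i ≠ i → gOk grid (cellI grid i) ∧ gOk grid (cellI grid (pGet parent i)) ∧
      gReach grid (cellI grid i) (cellI grid (pGet parent i))))

def rootOf (parent : List Int) (i : Int) : Int := pvFind parent (i.toNat + 1) i

lemma pvFind_stop (parent : List Int) (fuel : Nat) {i : Int} (h : pGet parent i = i) :
    pvFind parent fuel i = i := by
  cases fuel with
  | zero => rfl
  | succ fuel =>
    rw [pvFind]
    rw [pGet] at h
    rw [if_pos h]

lemma pvFind_spec (grid : List (List Int)) (parent : List Int) (hP : PInv grid parent) :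
    ∀ n : Nat, ∀ i : Int, 0 ≤ i → i < gH grid * gW grid → i.toNat = n →
    (∀ fuel : Nat, n < fuel → pvFind parent fuel i = rootOf parent i) ∧
    (0 ≤ rootOf parent i ∧ rootOf parent i ≤ i ∧
      pGet parent (rootOf parent i) = rootOf parent i ∧
      (rootOf parent i = i ∨ (gOk grid (cellI grid i) ∧ gOk grid (cellI grid (rootOf parent i)) ∧
        gReach grid (cellI grid i) (cellI grid (rootOf parent i))))) := by
  intro n
  induction n using Nat.strong_induction_on with
  | _ n ih =>
    intro i h0 h1 hn
    by_cases hroot : pGet parent i = i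
    · have hr : rootOf parent i = i := pvFind_stop parent _ hroot
      refine ⟨fun fuel _ => by rw [pvFind_stop parent fuel hroot, hr], ?_⟩
      rw [hr]
      exact ⟨h0, le_refl i, hroot, Or.inl rfl⟩
    · obtain ⟨hj0, hj1, hconn⟩ := (hP.2 i h0 h1)
      have hconn' := hconn hroot
      have hjlt : pGet parent i < i := lt_of_le_of_ne hj1 hroot
      have hjn : (pGet parent i).toNat < n := by omega
      obtain ⟨ihf, ihp⟩ := ih (pGet parent i).toNat hjn (pGet parent i) hj0 (by omega) rfl
      have hstep : ∀ fuel : Nat, n < fuel → pvFind parent fuel i =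
          pvFind parent (fuel - 1) (pGet parent i) := by
        intro fuel hf
        cases fuel with
        | zero => omega
        | succ fuel =>
          rw [pvFind]
          rw [if_neg ?_]
          · rfl
          · rw [← pGet]; exact hroot
      have hri : rootOf parent i = rootOf parent (pGet parent i) := by
        rw [rootOf, hstep (i.toNat + 1) (by omega)]
        exact ihf (i.toNat + 1 - 1) (by omega)
      refine ⟨fun fuel hf => ?_, ?_⟩
      · rw [hstep fuel hf, ihf (fuel - 1) (by omega), hri]
      · rw [hri]
        obtain ⟨k0, k1, k2, k3⟩ := ihp
        refine ⟨k0, by omega, k2, Or.inr ?_⟩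
        rcases k3 with heq | ⟨m1, m2, m3⟩
        · rw [heq]
          exact ⟨hconn'.1, hconn'.2.1, hconn'.2.2⟩
        · exact ⟨hconn'.1, m2, Relation.ReflTransGen.trans hconn'.2.2 m3⟩

lemma pvFind_fuel (grid : List (List Int)) (parent : List Int) (hP : PInv grid parent)
    {i : Int} (h0 : 0 ≤ i) (h1 : i < gH grid * gW grid) {fuel : Nat} (hf : i.toNat < fuel) :
    pvFind parent fuel i = rootOf parent i :=
  ((pvFind_spec grid parent hP i.toNat i h0 h1 rfl).1) fuel hf

lemma rootOf_props (grid : List (List Int)) (parent : List Int) (hP : PInv grid parent)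
    {i : Int} (h0 : 0 ≤ i) (h1 : i < gH grid * gW grid) :
    0 ≤ rootOf parent i ∧ rootOf parent i ≤ i ∧
      pGet parent (rootOf parent i) = rootOf parent i ∧
      (rootOf parent i = i ∨ (gOk grid (cellI grid i) ∧ gOk grid (cellI grid (rootOf parent i)) ∧
        gReach grid (cellI grid i) (cellI grid (rootOf parent i)))) :=
  (pvFind_spec grid parent hP i.toNat i h0 h1 rfl).2

lemma pGet_set (parent : List Int) {r0 r1 : Int} (hr0 : 0 ≤ r0) (hr0l : r0.toNat < parent.length)
    {i : Int} (h0 : 0 ≤ i) (hil : i.toNat < parent.length) :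
    pGet (PySem.List.pySetD parent r0 r1) i = if i = r0 then r1 else pGet parent i := by
  rw [pGet, PySem.List.pySetD_of_nonneg _ _ hr0, PySem.List.pyGetD_eq_getElem _ _ h0
    (by rw [List.length_set]; omega), pGet]
  by_cases h : i = r0
  · subst h
    rw [if_pos rfl, List.getElem_set_self]
  · rw [if_neg h, List.getElem_set_ne (by omega), ← PySem.List.pyGetD_eq_getElem _ _ h0 (by omega)]

lemma rootOf_step (grid : List (List Int)) (parent : List Int) (hP : PInv grid parent)
    {i : Int} (h0 : 0 ≤ i) (h1 : i < gH grid * gW grid) (hnr : pGet parent i ≠ i) :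
    rootOf parent i = rootOf parent (pGet parent i) := by
  obtain ⟨hj0, hj1, _⟩ := hP.2 i h0 h1
  have hjlt : pGet parent i < i := lt_of_le_of_ne hj1 hnr
  have h1' : rootOf parent i = pvFind parent i.toNat (pGet parent i) := by
    rw [rootOf]
    simp only [pvFind]
    rw [if_neg (by rw [← pGet]; exact hnr)]
    rw [← pGet]
  rw [h1', pvFind_fuel grid parent hP hj0 (by omega) (by omega)]

lemma link_PInv (grid : List (List Int)) {parent : List Int} (hP : PInv grid parent)
    {r0 r1 : Int} (h00 : 0 ≤ r0) (h01 : r0 < gH grid * gW grid)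
    (h10 : 0 ≤ r1) (hlt : r1 < r0)
    (hok0 : gOk grid (cellI grid r0)) (hok1 : gOk grid (cellI grid r1))
    (hre : gReach grid (cellI grid r0) (cellI grid r1)) :
    PInv grid (PySem.List.pySetD parent r0 r1) := by
  have hlen := hP.1
  have hr0l : r0.toNat < parent.length := by omega
  constructor
  · rw [PySem.List.pySetD_of_nonneg _ _ h00, List.length_set]
    exact hlen
  · intro i h0 h1
    rw [pGet_set parent h00 hr0l h0 (by omega)]
    by_cases h : i = r0
    · subst h
      rw [if_pos rfl]
      exact ⟨h10, by omega, fun _ => ⟨hok0, hok1, hre⟩⟩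
    · rw [if_neg h]
      exact hP.2 i h0 h1

lemma link_root (grid : List (List Int)) {parent : List Int} (hP : PInv grid parent)
    {r0 r1 : Int} (h00 : 0 ≤ r0) (h01 : r0 < gH grid * gW grid)
    (h10 : 0 ≤ r1) (hlt : r1 < r0)
    (hroot0 : pGet parent r0 = r0) (hroot1 : pGet parent r1 = r1)
    (hok0 : gOk grid (cellI grid r0)) (hok1 : gOk grid (cellI grid r1))
    (hre : gReach grid (cellI grid r0) (cellI grid r1)) :
    ∀ i : Int, 0 ≤ i → i < gH grid * gW grid →
      rootOf (PySem.List.pySetD parent r0 r1) i =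
        if rootOf parent i = r0 then r1 else rootOf parent i := by
  have hP' := link_PInv grid hP h00 h01 h10 hlt hok0 hok1 hre
  have hlen := hP.1
  have hr0l : r0.toNat < parent.length := by omega
  set parent' := PySem.List.pySetD parent r0 r1 with hpar
  have hget' : ∀ i : Int, 0 ≤ i → i < gH grid * gW grid →
      pGet parent' i = if i = r0 then r1 else pGet parent i := by
    intro i h0 h1
    exact pGet_set parent h00 hr0l h0 (by omega)
  have key : ∀ n : Nat, ∀ i : Int, 0 ≤ i → i < gH grid * gW grid → i.toNat = n →
      rootOf parent' i = if rootOf parent i = r0 then r1 else rootOf parent i := by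
    intro n
    induction n using Nat.strong_induction_on with
    | _ n ih =>
      intro i h0 h1 hn
      by_cases hroot : pGet parent i = i
      · have hri : rootOf parent i = i := pvFind_stop parent _ hroot
        by_cases hir : i = r0
        · subst hir
          rw [hri, if_pos rfl]
          have hg : pGet parent' i = r1 := by rw [hget' i h0 h1, if_pos rfl]
          have hL1 : rootOf parent' i = pvFind parent' i.toNat r1 := by
            rw [rootOf]
            simp only [pvFind]
            rw [if_neg (by rw [← pGet, hg]; omega)]
            rw [← pGet, hg]
          rw [hL1, pvFind_fuel grid parent' hP' h10 (by omega) (by omega)]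
          exact pvFind_stop parent' _ (by rw [hget' r1 h10 (by omega), if_neg (by omega)]; exact hroot1)
        · have hg : pGet parent' i = i := by rw [hget' i h0 h1, if_neg hir, hroot]
          have hL : rootOf parent' i = i := pvFind_stop parent' _ hg
          rw [hL, hri, if_neg hir]
      · obtain ⟨hj0, hj1, _⟩ := hP.2 i h0 h1
        have hjlt : pGet parent i < i := lt_of_le_of_ne hj1 hroot
        have hir : i ≠ r0 := by
          intro h
          rw [h] at hroot
          exact hroot hroot0
        have hg : pGet parent' i = pGet parent i := by rw [hget' i h0 h1, if_neg hir]
        rw [rootOf_step grid parent' hP' h0 h1 (by rw [hg]; omega), hg,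
          ih (pGet parent i).toNat (by omega) _ hj0 (by omega) rfl,
          ← rootOf_step grid parent hP h0 h1 hroot]
  intro i h0 h1
  exact key i.toNat i h0 h1 rfl

lemma HW_toNat (grid : List (List Int)) :
    (gH grid * gW grid).toNat = (gH grid).toNat * (gW grid).toNat := by
  rw [gH, gW, ← Nat.cast_mul, Int.toNat_natCast, Int.toNat_natCast, Int.toNat_natCast]

def nbrOk (grid : List (List Int)) (q : Int × Int) : Prop :=
  0 ≤ q.1 ∧ 0 ≤ q.2 ∧ q.2 < gW grid ∧ pvCell grid q.1 q.2 ≠ 0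

lemma nbr_adj (grid : List (List Int)) {p q : Int × Int} (hok : gOk grid p)
    (hq : q ∈ pvNbrs p.1 p.2) (hv : nbrOk grid q) :
    gAdj grid p q ∧ idxI grid q < idxI grid p := by
  obtain ⟨hp1, hp2, hp3, hp4, hp5⟩ := hok
  obtain ⟨hv1, hv2, hv3, hv4⟩ := hv
  have hrw : (p.1 - 1) * gW grid = p.1 * gW grid - gW grid := by ring
  simp only [pvNbrs, List.mem_cons, List.not_mem_nil, or_false] at hq
  have hq1le : q.1 ≤ p.1 := by rcases hq with h | h | h | h <;> simp [h]
  have hokq : gOk grid q := ⟨hv1, lt_of_le_of_lt hq1le hp2, hv2, hv3, hv4⟩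
  have hadj : gAdj grid p q := by
    refine ⟨⟨hp1, hp2, hp3, hp4, hp5⟩, hokq, ?_⟩
    rw [mem_pvDeltas_iff]
    rcases hq with h | h | h | h <;> (rw [h]; dsimp only; try omega)
  refine ⟨hadj, ?_⟩
  rw [idxI, idxI]
  rcases hq with h | h | h | h
  · rw [h]; dsimp only; linarith
  · rw [h] at hv3 ⊢
    dsimp only at hv3 ⊢
    linarith [hrw]
  · rw [h] at hv3 ⊢
    dsimp only at hv3 ⊢
    linarith [hrw]
  · rw [h] at hv3 ⊢
    dsimp only at hv3 ⊢
    linarith [hrw]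

lemma adj_lt_in_nbrs (grid : List (List Int)) {p q : Int × Int}
    (hadj : gAdj grid p q) (hlt : idxI grid q < idxI grid p) :
    q ∈ pvNbrs p.1 p.2 ∧ nbrOk grid q := by
  obtain ⟨hokp, hokq, hd⟩ := hadj
  rw [mem_pvDeltas_iff] at hd
  have hvq : nbrOk grid q := ⟨hokq.1, hokq.2.2.1, hokq.2.2.2.1, hokq.2.2.2.2⟩
  rw [idxI, idxI] at hlt
  refine ⟨?_, hvq⟩
  simp only [pvNbrs, List.mem_cons, List.not_mem_nil, or_false]
  have hWpos : 0 < gW grid := by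
    have := hokp.2.2.2.1
    have := hokp.2.2.1
    omega
  by_cases h1 : q.1 = p.1 + 1
  · exfalso
    rw [show q.1 * gW grid = p.1 * gW grid + gW grid from by rw [h1]; ring] at hlt
    have := hokp.2.2.2.1
    have := hokq.2.2.1
    omega
  by_cases h2 : q.1 = p.1
  · have h3 : q.2 = p.2 - 1 := by
      rw [h2] at hlt
      omega
    exact Or.inl (Prod.ext (by omega) (by omega))
  · have h4 : q.1 = p.1 - 1 := by omega
    rw [show q.1 * gW grid = p.1 * gW grid - gW grid from by rw [h4]; ring] at hlt
    have hq2 : q.2 = p.2 - 1 ∨ q.2 = p.2 ∨ q.2 = p.2 + 1 := by omega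
    rcases hq2 with h | h | h
    · exact Or.inr (Or.inl (Prod.ext (by omega) (by omega)))
    · exact Or.inr (Or.inr (Or.inl (Prod.ext (by omega) (by omega))))
    · exact Or.inr (Or.inr (Or.inr (Prod.ext (by omega) (by omega))))

def pvUStep (grid : List (List Int)) (h w r c : Int) (parent : List Int) (q : Int × Int) :
    List Int :=
  if 0 ≤ q.1 ∧ 0 ≤ q.2 ∧ q.2 < w ∧ pvCell grid q.1 q.2 ≠ 0 then
    let a := pvFind parent (h.toNat * w.toNat + 1) (r * w + c)
    let b := pvFind parent (h.toNat * w.toNat + 1) (q.1 * w + q.2)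
    if a ≠ b then
      if a < b then PySem.List.pySetD parent b a
      else PySem.List.pySetD parent a b
    else parent
  else parent

lemma pvUnionCell_eq (grid : List (List Int)) (h w : Int) (parent : List Int) (r c : Int) :
    pvUnionCell grid h w parent r c =
      if pvCell grid r c ≠ 0 then (pvNbrs r c).foldl (pvUStep grid h w r c) parent
      else parent := rfl

lemma unionFold (grid : List (List Int)) (hW : 0 < gW grid) {p : Int × Int}
    (hokp : gOk grid p) :
    ∀ (ds : List (Int × Int)), (∀ q ∈ ds, q ∈ pvNbrs p.1 p.2) →
    ∀ parent, PInv grid parent →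
    PInv grid (ds.foldl (pvUStep grid (gH grid) (gW grid) p.1 p.2) parent) ∧
    (∀ i j : Int, 0 ≤ i → i < gH grid * gW grid → 0 ≤ j → j < gH grid * gW grid →
      rootOf parent i = rootOf parent j →
      rootOf (ds.foldl (pvUStep grid (gH grid) (gW grid) p.1 p.2) parent) i =
        rootOf (ds.foldl (pvUStep grid (gH grid) (gW grid) p.1 p.2) parent) j) ∧
    (∀ q ∈ ds, nbrOk grid q →
      rootOf (ds.foldl (pvUStep grid (gH grid) (gW grid) p.1 p.2) parent) (idxI grid q) =
        rootOf (ds.foldl (pvUStep grid (gH grid) (gW grid) p.1 p.2) parent) (idxI grid p)) := by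
  have hpbounds := idxI_bounds grid hW ⟨hokp.1, hokp.2.1, hokp.2.2.1, hokp.2.2.2.1⟩
  have hcellp : cellI grid (idxI grid p) = p := cellI_idxI grid hW hokp.2.2.1 hokp.2.2.2.1
  intro ds
  induction ds with
  | nil =>
    intro _ parent hP
    refine ⟨hP, fun i j _ _ _ _ h => h, fun q hq => absurd hq (List.not_mem_nil)⟩
  | cons q ds ih =>
    intro hds parent hP
    rw [List.foldl_cons]
    by_cases hv : nbrOk grid q
    · obtain ⟨hadj, hlt⟩ := nbr_adj grid hokp (hds q List.mem_cons_self) hv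
      have hokq : gOk grid q := hadj.2.1
      have hqbounds := idxI_bounds grid hW ⟨hokq.1, hokq.2.1, hokq.2.2.1, hokq.2.2.2.1⟩
      have hcellq : cellI grid (idxI grid q) = q := cellI_idxI grid hW hokq.2.2.1 hokq.2.2.2.1
      have hfuel : ∀ k : Int, 0 ≤ k → k < gH grid * gW grid →
          k.toNat < (gH grid).toNat * (gW grid).toNat + 1 := by
        intro k hk0 hk1
        have : k.toNat < (gH grid * gW grid).toNat := by omega
        rw [HW_toNat] at this
        omega
      have ha : pvFind parent ((gH grid).toNat * (gW grid).toNat + 1) (p.1 * gW grid + p.2)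
          = rootOf parent (idxI grid p) :=
        pvFind_fuel grid parent hP hpbounds.1 hpbounds.2 (hfuel _ hpbounds.1 hpbounds.2)
      have hb : pvFind parent ((gH grid).toNat * (gW grid).toNat + 1) (q.1 * gW grid + q.2)
          = rootOf parent (idxI grid q) :=
        pvFind_fuel grid parent hP hqbounds.1 hqbounds.2 (hfuel _ hqbounds.1 hqbounds.2)
      have hv' : 0 ≤ q.1 ∧ 0 ≤ q.2 ∧ q.2 < gW grid ∧ pvCell grid q.1 q.2 ≠ 0 := hv
      have hstep : pvUStep grid (gH grid) (gW grid) p.1 p.2 parent q =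
          (if rootOf parent (idxI grid p) ≠ rootOf parent (idxI grid q) then
            (if rootOf parent (idxI grid p) < rootOf parent (idxI grid q) then
              PySem.List.pySetD parent (rootOf parent (idxI grid q)) (rootOf parent (idxI grid p))
            else
              PySem.List.pySetD parent (rootOf parent (idxI grid p)) (rootOf parent (idxI grid q)))
          else parent) := by
        simp only [pvUStep]
        rw [if_pos hv', ha, hb]
      rw [hstep]
      -- facts about the two roots
      obtain ⟨ka0, ka1, ka2, ka3⟩ := rootOf_props grid parent hP hpbounds.1 hpbounds.2
      obtain ⟨kb0, kb1, kb2, kb3⟩ := rootOf_props grid parent hP hqbounds.1 hqbounds.2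
      have hoa : gOk grid (cellI grid (rootOf parent (idxI grid p))) := by
        rcases ka3 with h | h
        · rw [h, hcellp]; exact hokp
        · exact h.2.1
      have hob : gOk grid (cellI grid (rootOf parent (idxI grid q))) := by
        rcases kb3 with h | h
        · rw [h, hcellq]; exact hokq
        · exact h.2.1
      have hra : gReach grid p (cellI grid (rootOf parent (idxI grid p))) := by
        rcases ka3 with h | h
        · rw [h, hcellp]
          exact Relation.ReflTransGen.refl
        · rw [hcellp] at h
          exact h.2.2
      have hrb : gReach grid q (cellI grid (rootOf parent (idxI grid q))) := by
        rcases kb3 with h | h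
        · rw [h, hcellq]
          exact Relation.ReflTransGen.refl
        · rw [hcellq] at h
          exact h.2.2
      have hab : gReach grid (cellI grid (rootOf parent (idxI grid p)))
          (cellI grid (rootOf parent (idxI grid q))) :=
        Relation.ReflTransGen.trans (gReach_symm hra)
          (Relation.ReflTransGen.trans (Relation.ReflTransGen.single hadj) hrb)
      by_cases hne : rootOf parent (idxI grid p) ≠ rootOf parent (idxI grid q)
      · rw [if_pos hne]
        by_cases hltr : rootOf parent (idxI grid p) < rootOf parent (idxI grid q)
        · -- link root(q)-side below root(p)-side: parent[b] := a
          rw [if_pos hltr]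
          set A := rootOf parent (idxI grid p) with hA
          set B := rootOf parent (idxI grid q) with hB
          have hP1 : PInv grid (PySem.List.pySetD parent B A) :=
            link_PInv grid hP kb0 (by omega) ka0 hltr hob hoa (gReach_symm hab)
          have hform := link_root grid hP kb0 (by omega) ka0 hltr kb2 ka2 hob hoa (gReach_symm hab)
          obtain ⟨c1, c2, c3⟩ := ih (fun x hx => hds x (List.mem_cons_of_mem _ hx)) _ hP1
          refine ⟨c1, ?_, ?_⟩
          · intro i j hi0 hi1 hj0 hj1 heq
            apply c2 i j hi0 hi1 hj0 hj1
            rw [hform i hi0 hi1, hform j hj0 hj1, heq]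
          · intro x hx hvx
            rcases List.mem_cons.1 hx with rfl | hx'
            · apply c2 _ _ hqbounds.1 hqbounds.2 hpbounds.1 hpbounds.2
              rw [hform _ hqbounds.1 hqbounds.2, hform _ hpbounds.1 hpbounds.2, ← hA, ← hB,
                if_pos rfl, if_neg (by omega)]
            · exact c3 x hx' hvx
        · -- parent[a] := b
          rw [if_neg hltr]
          set A := rootOf parent (idxI grid p) with hA
          set B := rootOf parent (idxI grid q) with hB
          have hba : B < A := by omega
          have hP1 : PInv grid (PySem.List.pySetD parent A B) :=
            link_PInv grid hP ka0 (by omega) kb0 hba hoa hob hab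
          have hform := link_root grid hP ka0 (by omega) kb0 hba ka2 kb2 hoa hob hab
          obtain ⟨c1, c2, c3⟩ := ih (fun x hx => hds x (List.mem_cons_of_mem _ hx)) _ hP1
          refine ⟨c1, ?_, ?_⟩
          · intro i j hi0 hi1 hj0 hj1 heq
            apply c2 i j hi0 hi1 hj0 hj1
            rw [hform i hi0 hi1, hform j hj0 hj1, heq]
          · intro x hx hvx
            rcases List.mem_cons.1 hx with rfl | hx'
            · apply c2 _ _ hqbounds.1 hqbounds.2 hpbounds.1 hpbounds.2
              rw [hform _ hqbounds.1 hqbounds.2, hform _ hpbounds.1 hpbounds.2, ← hA, ← hB,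
                if_neg (by omega), if_pos rfl]
            · exact c3 x hx' hvx
      · rw [if_neg hne]
        push_neg at hne
        obtain ⟨c1, c2, c3⟩ := ih (fun x hx => hds x (List.mem_cons_of_mem _ hx)) parent hP
        refine ⟨c1, c2, ?_⟩
        intro x hx hvx
        rcases List.mem_cons.1 hx with rfl | hx'
        · exact c2 _ _ hqbounds.1 hqbounds.2 hpbounds.1 hpbounds.2 hne.symm
        · exact c3 x hx' hvx
    · have hv'' : ¬ (0 ≤ q.1 ∧ 0 ≤ q.2 ∧ q.2 < gW grid ∧ pvCell grid q.1 q.2 ≠ 0) := hv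
      have hstep : pvUStep grid (gH grid) (gW grid) p.1 p.2 parent q = parent := by
        simp only [pvUStep]
        rw [if_neg hv'']
      rw [hstep]
      obtain ⟨c1, c2, c3⟩ := ih (fun x hx => hds x (List.mem_cons_of_mem _ hx)) parent hP
      refine ⟨c1, c2, ?_⟩
      intro x hx hvx
      rcases List.mem_cons.1 hx with rfl | hx'
      · exact absurd hvx hv
      · exact c3 x hx' hvx

def Inv1 (grid : List (List Int)) (l1 : List (Int × Int)) (parent : List Int) : Prop :=
  PInv grid parent ∧
  ∀ p ∈ l1, ∀ q, gAdj grid p q → idxI grid q < idxI grid p →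
    rootOf parent (idxI grid q) = rootOf parent (idxI grid p)

lemma step1_preserve (grid : List (List Int)) (hW : 0 < gW grid)
    {l1 l2 : List (Int × Int)} {p : Int × Int} (hsplit : LL grid = l1 ++ p :: l2)
    {parent : List Int} (hInv : Inv1 grid l1 parent) :
    Inv1 grid (l1 ++ [p]) (pvUnionCell grid (gH grid) (gW grid) parent p.1 p.2) := by
  obtain ⟨hP, heq⟩ := hInv
  have hpL : p ∈ LL grid := by rw [hsplit]; simp
  have hpb := (mem_LL_iff grid hW p).1 hpL
  rw [pvUnionCell_eq]
  by_cases hz : pvCell grid p.1 p.2 ≠ 0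
  · rw [if_pos hz]
    have hok : gOk grid p := ⟨hpb.1, hpb.2.1, hpb.2.2.1, hpb.2.2.2, hz⟩
    obtain ⟨c1, c2, c3⟩ := unionFold grid hW hok (pvNbrs p.1 p.2) (fun q hq => hq) parent hP
    refine ⟨c1, ?_⟩
    intro p' hp' q hadj hlt
    have hbq := idxI_bounds grid hW
      ⟨hadj.2.1.1, hadj.2.1.2.1, hadj.2.1.2.2.1, hadj.2.1.2.2.2.1⟩
    have hbp' := idxI_bounds grid hW
      ⟨hadj.1.1, hadj.1.2.1, hadj.1.2.2.1, hadj.1.2.2.2.1⟩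
    rcases List.mem_append.1 hp' with h | h
    · exact c2 _ _ hbq.1 hbq.2 hbp'.1 hbp'.2 (heq p' h q hadj hlt)
    · simp only [List.mem_singleton] at h
      subst h
      obtain ⟨hmem, hvx⟩ := adj_lt_in_nbrs grid hadj hlt
      exact c3 q hmem hvx
  · rw [if_neg hz]
    refine ⟨hP, ?_⟩
    intro p' hp' q hadj hlt
    rcases List.mem_append.1 hp' with h | h
    · exact heq p' h q hadj hlt
    · simp only [List.mem_singleton] at h
      subst h
      exact absurd hadj.1.2.2.2.2 (by push_neg at hz; intro hcon; exact hcon hz)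

lemma fold1 (grid : List (List Int)) (hW : 0 < gW grid) :
    ∀ (l2 l1 : List (Int × Int)) (parent : List Int),
    LL grid = l1 ++ l2 → Inv1 grid l1 parent →
    Inv1 grid (l1 ++ l2)
      (l2.foldl (fun par (p : Int × Int) => pvUnionCell grid (gH grid) (gW grid) par p.1 p.2) parent) := by
  intro l2
  induction l2 with
  | nil =>
    intro l1 parent h hInv
    simpa using hInv
  | cons p l2 ih =>
    intro l1 parent h hInv
    rw [List.foldl_cons]
    have h2 : LL grid = (l1 ++ [p]) ++ l2 := by rw [h]; simp
    have := ih (l1 ++ [p]) _ h2 (step1_preserve grid hW h hInv)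
    simpa using this

lemma rootEq_adj (grid : List (List Int)) (hW : 0 < gW grid) {parent : List Int}
    (hInv : Inv1 grid (LL grid) parent) {p q : Int × Int} (hadj : gAdj grid p q) :
    rootOf parent (idxI grid p) = rootOf parent (idxI grid q) := by
  rcases lt_trichotomy (idxI grid q) (idxI grid p) with h | h | h
  · exact (hInv.2 p (ok_mem_LL grid hW hadj.1) q hadj h).symm
  · rw [h]
  · exact hInv.2 q (ok_mem_LL grid hW hadj.2.1) p (gAdj_symm hadj) h

lemma rootEq_reach (grid : List (List Int)) (hW : 0 < gW grid) {parent : List Int}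
    (hInv : Inv1 grid (LL grid) parent) {p q : Int × Int} (hre : gReach grid p q) :
    rootOf parent (idxI grid p) = rootOf parent (idxI grid q) := by
  induction hre with
  | refl => rfl
  | tail _ hadj ih => exact ih.trans (rootEq_adj grid hW hInv hadj)

-- the heart of B: after phase 1, every nonzero cell's root is the flat index of
-- the scan-order minimum of its component
lemma root_char (grid : List (List Int)) (hW : 0 < gW grid) {parent : List Int}
    (hInv : Inv1 grid (LL grid) parent) {p s : Int × Int}
    (hok : gOk grid p) (hs : isMin grid s) (hr : gReach grid s p) :
    rootOf parent (idxI grid p) = idxI grid s := by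
  have hP := hInv.1
  have hpb := idxI_bounds grid hW ⟨hok.1, hok.2.1, hok.2.2.1, hok.2.2.2.1⟩
  have hsb := idxI_bounds grid hW ⟨hs.1.1, hs.1.2.1, hs.1.2.2.1, hs.1.2.2.2.1⟩
  obtain ⟨k0, k1, k2, k3⟩ := rootOf_props grid parent hP hpb.1 hpb.2
  have hcellp : cellI grid (idxI grid p) = p := cellI_idxI grid hW hok.2.2.1 hok.2.2.2.1
  have hrc : gReach grid p (cellI grid (rootOf parent (idxI grid p))) := by
    rcases k3 with heq | ⟨_, _, m3⟩
    · rw [heq, hcellp]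
      exact Relation.ReflTransGen.refl
    · rw [hcellp] at m3
      exact m3
  have hse : rootOf parent (idxI grid s) = rootOf parent (idxI grid p) :=
    rootEq_reach grid hW hInv hr
  have hle : rootOf parent (idxI grid s) ≤ idxI grid s :=
    (rootOf_props grid parent hP hsb.1 hsb.2).2.1
  have hge : idxI grid s ≤ idxI grid (cellI grid (rootOf parent (idxI grid p))) :=
    hs.2 _ (Relation.ReflTransGen.trans hr hrc)
  rw [idxI_cellI grid hW _] at hge
  omega

-- ===== B phase 2: bbox accumulation per root =====
def bbStep (bb : Int × Int × Int × Int) (p : Int × Int) : Int × Int × Int × Int :=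
  (min bb.1 p.1, max bb.2.1 p.1, min bb.2.2.1 p.2, max bb.2.2.2 p.2)

def bbF : List (Int × Int) → Int × Int × Int × Int
  | [] => (0, 0, 0, 0)
  | x :: t => t.foldl bbStep (x.1, x.1, x.2, x.2)

lemma bbF_append {l : List (Int × Int)} (h : l ≠ []) (p : Int × Int) :
    bbF (l ++ [p]) = bbStep (bbF l) p := by
  cases l with
  | nil => exact absurd rfl h
  | cons x t =>
    show (t ++ [p]).foldl bbStep (x.1, x.1, x.2, x.2) =
      bbStep (t.foldl bbStep (x.1, x.1, x.2, x.2)) p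
    rw [List.foldl_append]
    rfl

lemma classIn_self_mem (grid : List (List Int)) {l : List (Int × Int)} {s : Int × Int}
    (h : s ∈ l) : s ∈ classIn grid l s :=
  (mem_classIn grid l s s).2 ⟨h, Relation.ReflTransGen.refl⟩

lemma keys_boxes (grid : List (List Int)) (l1 : List (Int × Int))
    (boxes : PySem.Dict Int (Int × Int × Int × Int))
    (hb : boxes.items = (minsIn grid l1).map (fun s => (idxI grid s, bbF (classIn grid l1 s)))) :
    boxes.keys = (minsIn grid l1).map (fun s => idxI grid s) := by
  simp only [PySem.Dict.keys, hb, List.map_map]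
  rfl

lemma minsIn_pairwise (grid : List (List Int)) (hW : 0 < gW grid)
    {l1 l2 : List (Int × Int)} (hsplit : LL grid = l1 ++ l2) :
    (minsIn grid l1).Pairwise (fun a b => idxI grid a < idxI grid b) := by
  have h := pairwise_LL grid hW
  rw [hsplit, List.pairwise_append] at h
  exact List.Pairwise.sublist (List.filter_sublist (l := l1)) h.1

lemma keys_nodup (grid : List (List Int)) (hW : 0 < gW grid)
    {l1 l2 : List (Int × Int)} (hsplit : LL grid = l1 ++ l2)
    (boxes : PySem.Dict Int (Int × Int × Int × Int))
    (hb : boxes.items = (minsIn grid l1).map (fun s => (idxI grid s, bbF (classIn grid l1 s)))) :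
    boxes.keys.Nodup := by
  rw [keys_boxes grid l1 boxes hb]
  have hpw : (List.map (fun s => idxI grid s) (minsIn grid l1)).Pairwise (· < ·) := by
    rw [List.pairwise_map]
    exact minsIn_pairwise grid hW hsplit
  exact hpw.imp (fun h => ne_of_lt h)

lemma step2_preserve (grid : List (List Int)) (hW : 0 < gW grid) {parentF : List Int}
    (hInv1 : Inv1 grid (LL grid) parentF)
    {l1 l2 : List (Int × Int)} {p : Int × Int} (hsplit : LL grid = l1 ++ p :: l2)
    {boxes : PySem.Dict Int (Int × Int × Int × Int)}
    (hb : boxes.items = (minsIn grid l1).map (fun s => (idxI grid s, bbF (classIn grid l1 s)))) :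
    (pvBoxCell grid (gH grid) (gW grid) parentF boxes p.1 p.2).items =
      (minsIn grid (l1 ++ [p])).map
        (fun s => (idxI grid s, bbF (classIn grid (l1 ++ [p]) s))) := by
  have hpL : p ∈ LL grid := by rw [hsplit]; simp
  have hpb := (mem_LL_iff grid hW p).1 hpL
  have hpnotl1 : p ∉ l1 := LL_split_not_mem grid hW hsplit
  by_cases hz : pvCell grid p.1 p.2 ≠ 0
  · have hok : gOk grid p := ⟨hpb.1, hpb.2.1, hpb.2.2.1, hpb.2.2.2, hz⟩
    obtain ⟨m, hmmin, hrm⟩ := minExists grid hW p hok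
    have hib := idxI_bounds grid hW ⟨hok.1, hok.2.1, hok.2.2.1, hok.2.2.2.1⟩
    have hfuel : (idxI grid p).toNat < (gH grid).toNat * (gW grid).toNat + 1 := by
      have : (idxI grid p).toNat < (gH grid * gW grid).toNat := by omega
      rw [HW_toNat] at this
      omega
    have hroot : pvFind parentF ((gH grid).toNat * (gW grid).toNat + 1)
        (p.1 * gW grid + p.2) = idxI grid m := by
      have h1 : pvFind parentF ((gH grid).toNat * (gW grid).toNat + 1) (idxI grid p)
          = rootOf parentF (idxI grid p) := pvFind_fuel grid parentF hInv1.1 hib.1 hib.2 hfuel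
      rw [show p.1 * gW grid + p.2 = idxI grid p from rfl, h1]
      exact root_char grid hW hInv1 hok hmmin (gReach_symm hrm)
    have hstep0 : pvBoxCell grid (gH grid) (gW grid) parentF boxes p.1 p.2 =
        (match PySem.Dict.get? boxes (idxI grid m) with
        | some bb => PySem.Dict.insert boxes (idxI grid m) (bbStep bb p)
        | none => PySem.Dict.insert boxes (idxI grid m) (p.1, p.1, p.2, p.2)) := by
      simp only [pvBoxCell]
      rw [if_pos hz, hroot]
      rfl
    rw [hstep0]
    have hnodup := keys_nodup grid hW hsplit boxes hb
    by_cases hmp : m = p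
    · -- p starts a new component: fresh key appended at the end
      subst hmp
      have hnotmem : idxI grid m ∉ boxes.keys := by
        rw [keys_boxes grid l1 boxes hb]
        intro hmem
        obtain ⟨s, hs, hidx⟩ := List.mem_map.1 hmem
        have hsm := (mem_minsIn grid l1 s).1 hs
        have : s = m := idxI_inj grid hW hsm.2.1.2.2.1 hsm.2.1.2.2.2.1
          hok.2.2.1 hok.2.2.2.1 hidx
        exact hpnotl1 (this ▸ hsm.1)
      have hget : PySem.Dict.get? boxes (idxI grid m) = none :=
        (PySem.Dict.get?_eq_none_iff_not_mem_keys boxes (idxI grid m)).2 hnotmem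
      rw [hget]
      have hcont : boxes.contains (idxI grid m) = false := by
        rw [PySem.Dict.contains_eq_isSome_get?, hget]
        rfl
      rw [PySem.Dict.items_insert_of_not_contains boxes _ hcont, hb,
        minsIn_append_pos grid l1 hmmin, List.map_append]
      congr 1
      · apply List.map_congr_left
        intro s hs
        have hsm := (mem_minsIn grid l1 s).1 hs
        rw [classIn_append_neg grid l1 ?_]
        intro hre
        have : s = m := minUnique grid hW hsm.2 hmmin hre
        exact hpnotl1 (this ▸ hsm.1)
      · have hcl1 : classIn grid l1 m = [] := by
          rw [List.eq_nil_iff_forall_not_mem]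
          intro x hx
          obtain ⟨hxl1, hxr⟩ := (mem_classIn grid l1 m x).1 hx
          have h1 : idxI grid m ≤ idxI grid x := hmmin.2 x hxr
          have h2 := (LL_split_lt grid hW hsplit).1 x hxl1
          omega
        rw [List.map_singleton, classIn_append_pos grid l1 Relation.ReflTransGen.refl, hcl1]
        rfl
    · -- p joins the component whose minimum m was scanned earlier
      have hlt : idxI grid m < idxI grid p := by
        have h1 : idxI grid m ≤ idxI grid p := hmmin.2 p (gReach_symm hrm)
        rcases lt_or_eq_of_le h1 with h | h
        · exact h
        · exact absurd (idxI_inj grid hW hmmin.1.2.2.1 hmmin.1.2.2.2.1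
            hok.2.2.1 hok.2.2.2.1 h) hmp
      have hml1 : m ∈ l1 := LL_split_mem_l1 grid hW hsplit (ok_mem_LL grid hW hmmin.1) hlt
      have hmmem : m ∈ minsIn grid l1 := (mem_minsIn grid l1 m).2 ⟨hml1, hmmin⟩
      have hitem : (idxI grid m, bbF (classIn grid l1 m)) ∈ boxes.items := by
        rw [hb]
        exact List.mem_map.2 ⟨m, hmmem, rfl⟩
      have hget : PySem.Dict.get? boxes (idxI grid m) = some (bbF (classIn grid l1 m)) :=
        PySem.Dict.get?_of_mem_items boxes hitem hnodup
      rw [hget]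
      have hcont : boxes.contains (idxI grid m) = true := by
        rw [PySem.Dict.contains_eq_isSome_get?, hget]
        rfl
      have hnminp : ¬ isMin grid p := by
        intro hpmin
        exact hmp (minUnique grid hW hpmin hmmin hrm).symm
      rw [PySem.Dict.items_insert_of_contains boxes _ hcont, hb, List.map_map,
        minsIn_append_neg grid l1 hnminp]
      apply List.map_congr_left
      intro s hs
      have hsm := (mem_minsIn grid l1 s).1 hs
      by_cases hsmm : s = m
      · subst hsmm
        simp only [Function.comp_apply, beq_self_eq_true, if_true]
        rw [classIn_append_pos grid l1 (gReach_symm hrm),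
          bbF_append (List.ne_nil_of_mem (classIn_self_mem grid hml1)) p]
      · have hne : idxI grid s ≠ idxI grid m := by
          intro h
          exact hsmm (idxI_inj grid hW hsm.2.1.2.2.1 hsm.2.1.2.2.2.1
            hmmin.1.2.2.1 hmmin.1.2.2.2.1 h)
        simp only [Function.comp_apply, beq_eq_false_iff_ne.2 hne, Bool.false_eq_true, if_false]
        rw [classIn_append_neg grid l1 ?_]
        intro hre
        exact hsmm (minUnique grid hW hsm.2 hmmin (Relation.ReflTransGen.trans hre hrm))
  · push_neg at hz
    have hstep : pvBoxCell grid (gH grid) (gW grid) parentF boxes p.1 p.2 = boxes := by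
      simp only [pvBoxCell]
      rw [if_neg (by rw [hz]; simp)]
    have hnmin : ¬ isMin grid p := fun hpm => hpm.1.2.2.2.2 hz
    rw [hstep, hb, minsIn_append_neg grid l1 hnmin]
    apply List.map_congr_left
    intro s hs
    have hsm := (mem_minsIn grid l1 s).1 hs
    rw [classIn_append_neg grid l1 ?_]
    intro hre
    exact (reach_ok hsm.2.1 hre).2.2.2.2 hz

lemma fold2 (grid : List (List Int)) (hW : 0 < gW grid) {parentF : List Int}
    (hInv1 : Inv1 grid (LL grid) parentF) :
    ∀ (l2 l1 : List (Int × Int)) (boxes : PySem.Dict Int (Int × Int × Int × Int)),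
    LL grid = l1 ++ l2 →
    boxes.items = (minsIn grid l1).map (fun s => (idxI grid s, bbF (classIn grid l1 s))) →
    (l2.foldl (fun bx (p : Int × Int) => pvBoxCell grid (gH grid) (gW grid) parentF bx p.1 p.2)
      boxes).items =
      (minsIn grid (l1 ++ l2)).map (fun s => (idxI grid s, bbF (classIn grid (l1 ++ l2) s))) := by
  intro l2
  induction l2 with
  | nil =>
    intro l1 boxes h hb
    simpa using hb
  | cons p l2 ih =>
    intro l1 boxes h hb
    rw [List.foldl_cons]
    have h2 : LL grid = (l1 ++ [p]) ++ l2 := by rw [h]; simp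
    have := ih (l1 ++ [p]) _ h2 (step2_preserve grid hW hInv1 h hb)
    simpa using this

-- ===== B phase 3: the bbox fold equals the min?/max? candidates =====
lemma bbF_comp : ∀ (t : List (Int × Int)) (a b c d : Int),
    t.foldl bbStep (a, b, c, d) =
      (t.foldl (fun m p => min m p.1) a, t.foldl (fun m p => max m p.1) b,
       t.foldl (fun m p => min m p.2) c, t.foldl (fun m p => max m p.2) d) := by
  intro t
  induction t with
  | nil => intro a b c d; rfl
  | cons q t ih =>
    intro a b c d
    simp only [List.foldl_cons]
    exact ih _ _ _ _

lemma foldl_min_facts (f : Int × Int → Int) :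
    ∀ (t : List (Int × Int)) (a : Int),
    (t.foldl (fun m p => min m (f p)) a = a ∨ ∃ p ∈ t, t.foldl (fun m p => min m (f p)) a = f p) ∧
    t.foldl (fun m p => min m (f p)) a ≤ a ∧
    ∀ p ∈ t, t.foldl (fun m p => min m (f p)) a ≤ f p := by
  intro t
  induction t with
  | nil =>
    intro a
    exact ⟨Or.inl rfl, le_refl a, by simp⟩
  | cons q t ih =>
    intro a
    rw [List.foldl_cons]
    obtain ⟨h1, h2, h3⟩ := ih (min a (f q))
    refine ⟨?_, le_trans h2 (min_le_left _ _), ?_⟩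
    · rcases h1 with h | ⟨p, hp, he⟩
      · rcases min_choice a (f q) with hm | hm
        · exact Or.inl (h.trans hm)
        · exact Or.inr ⟨q, List.mem_cons_self, h.trans hm⟩
      · exact Or.inr ⟨p, List.mem_cons_of_mem _ hp, he⟩
    · intro p hp
      rcases List.mem_cons.1 hp with rfl | hp'
      · exact le_trans h2 (min_le_right _ _)
      · exact h3 p hp'

lemma foldl_max_facts (f : Int × Int → Int) :
    ∀ (t : List (Int × Int)) (a : Int),
    (t.foldl (fun m p => max m (f p)) a = a ∨ ∃ p ∈ t, t.foldl (fun m p => max m (f p)) a = f p) ∧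
    a ≤ t.foldl (fun m p => max m (f p)) a ∧
    ∀ p ∈ t, f p ≤ t.foldl (fun m p => max m (f p)) a := by
  intro t
  induction t with
  | nil =>
    intro a
    exact ⟨Or.inl rfl, le_refl a, by simp⟩
  | cons q t ih =>
    intro a
    rw [List.foldl_cons]
    obtain ⟨h1, h2, h3⟩ := ih (max a (f q))
    refine ⟨?_, le_trans (le_max_left _ _) h2, ?_⟩
    · rcases h1 with h | ⟨p, hp, he⟩
      · rcases max_choice a (f q) with hm | hm
        · exact Or.inl (h.trans hm)
        · exact Or.inr ⟨q, List.mem_cons_self, h.trans hm⟩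
      · exact Or.inr ⟨p, List.mem_cons_of_mem _ hp, he⟩
    · intro p hp
      rcases List.mem_cons.1 hp with rfl | hp'
      · exact le_trans (le_max_right _ _) h2
      · exact h3 p hp'

lemma min?_map_foldl (f : Int × Int → Int) (x : Int × Int) (t : List (Int × Int)) :
    PySem.List.min? ((x :: t).map f) (fun y => y) =
      some (t.foldl (fun m p => min m (f p)) (f x)) := by
  obtain ⟨h1, h2, h3⟩ := foldl_min_facts f t (f x)
  cases hm : PySem.List.min? ((x :: t).map f) (fun y => y) with
  | none => exact absurd ((PySem.List.min?_eq_none_iff _ _).1 hm) (by simp)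
  | some m =>
    have hmm : m ∈ (x :: t).map f := PySem.List.min?_mem hm
    have hvmem : t.foldl (fun m p => min m (f p)) (f x) ∈ (x :: t).map f := by
      rcases h1 with h | ⟨p, hp, he⟩
      · rw [h]
        exact List.mem_map.2 ⟨x, List.mem_cons_self, rfl⟩
      · rw [he]
        exact List.mem_map.2 ⟨p, List.mem_cons_of_mem _ hp, rfl⟩
    have hle1 : m ≤ t.foldl (fun m p => min m (f p)) (f x) :=
      PySem.List.min?_isMin hm _ hvmem
    have hle2 : t.foldl (fun m p => min m (f p)) (f x) ≤ m := by
      obtain ⟨y, hy, rfl⟩ := List.mem_map.1 hmm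
      rcases List.mem_cons.1 hy with rfl | hy'
      · exact h2
      · exact h3 _ hy'
    simp only [Option.some.injEq]
    omega

lemma max?_map_foldl (f : Int × Int → Int) (x : Int × Int) (t : List (Int × Int)) :
    PySem.List.max? ((x :: t).map f) (fun y => y) =
      some (t.foldl (fun m p => max m (f p)) (f x)) := by
  obtain ⟨h1, h2, h3⟩ := foldl_max_facts f t (f x)
  cases hm : PySem.List.max? ((x :: t).map f) (fun y => y) with
  | none => exact absurd ((PySem.List.max?_eq_none_iff _ _).1 hm) (by simp)
  | some m =>
    have hmm : m ∈ (x :: t).map f := PySem.List.max?_mem hm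
    have hvmem : t.foldl (fun m p => max m (f p)) (f x) ∈ (x :: t).map f := by
      rcases h1 with h | ⟨p, hp, he⟩
      · rw [h]
        exact List.mem_map.2 ⟨x, List.mem_cons_self, rfl⟩
      · rw [he]
        exact List.mem_map.2 ⟨p, List.mem_cons_of_mem _ hp, rfl⟩
    have hle1 : t.foldl (fun m p => max m (f p)) (f x) ≤ m :=
      PySem.List.max?_isMax hm _ hvmem
    have hle2 : m ≤ t.foldl (fun m p => max m (f p)) (f x) := by
      obtain ⟨y, hy, rfl⟩ := List.mem_map.1 hmm
      rcases List.mem_cons.1 hy with rfl | hy'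
      · exact h2
      · exact h3 _ hy'
    simp only [Option.some.injEq]
    omega

lemma bbF_eq {l : List (Int × Int)} (h : l ≠ []) :
    bbF l = (pvR0 l, pvR1 l, pvC0 l, pvC1 l) := by
  cases l with
  | nil => exact absurd rfl h
  | cons x t =>
    show t.foldl bbStep (x.1, x.1, x.2, x.2) = _
    rw [bbF_comp, pvR0, pvR1, pvC0, pvC1,
      min?_map_foldl (fun p => p.1) x t, max?_map_foldl (fun p => p.1) x t,
      min?_map_foldl (fun p => p.2) x t, max?_map_foldl (fun p => p.2) x t]
    rfl

lemma selB_cand (grid : List (List Int)) {l : List (Int × Int)} (h : l ≠ [])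
    (acc : List (List Int) × Int) :
    pvSelStepB grid acc (bbF l) = pvSelStep grid acc (pvCand grid l) := by
  rw [bbF_eq h]
  simp only [pvSelStepB, pvSelStep, pvCand, pvSub]

lemma fold_values_eq (grid : List (List Int)) :
    ((minsIn grid (LL grid)).map (fun s => bbF (classIn grid (LL grid) s))).foldl
        (pvSelStepB grid) (grid, -1) =
      (candList grid (LL grid)).foldl (pvSelStep grid) (grid, -1) := by
  rw [candList, List.foldl_map, List.foldl_map]
  apply PySem.List.foldl_congr_mem
  intro acc s hs
  have hsm := (mem_minsIn grid (LL grid) s).1 hs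
  exact selB_cand grid (List.ne_nil_of_mem (classIn_self_mem grid hsm.1)) acc

lemma PInv_init (grid : List (List Int)) :
    PInv grid (PySem.List.pyRange 0 (gH grid * gW grid) 1) := by
  have hlen : (PySem.List.pyRange 0 (gH grid * gW grid) 1).length
      = (gH grid * gW grid).toNat := by
    rw [PySem.List.length_pyRange_one]
    simp
  refine ⟨hlen, ?_⟩
  intro i h0 h1
  have hget : pGet (PySem.List.pyRange 0 (gH grid * gW grid) 1) i = i := by
    rw [pGet, PySem.List.pyGetD_eq_getElem _ _ h0 (by rw [hlen]; omega),
      PySem.List.getElem_pyRange_one]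
    omega
  rw [hget]
  exact ⟨h0, le_refl i, fun hc => absurd rfl hc⟩

-- ===== assembling both ports =====
lemma A_final (grid : List (List Int)) (hW : 0 < gW grid)
    (hne : ¬ (grid = [] ∨ grid.headD [] = [])) :
    most_colorful_subgrid grid =
      ((candList grid (LL grid)).foldl (pvSelStep grid) (grid, -1)).1 := by
  have conv1 : (PySem.List.pyRange 0 (grid.length : Int) 1).foldl
      (fun st r => (PySem.List.pyRange 0 ((grid.headD []).length : Int) 1).foldl
        (fun st c => pvStepA grid (grid.length : Int) ((grid.headD []).length : Int) st r c) st)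
      ((PySem.List.pyRange 0 (grid.length : Int) 1).map
        (fun _ => PySem.List.pyRepeat [false] ((grid.headD []).length : Int)), grid, (-1 : Int))
      = (LL grid).foldl (fun st (p : Int × Int) => pvStepA grid (gH grid) (gW grid) st p.1 p.2)
        ((PySem.List.pyRange 0 (grid.length : Int) 1).map
          (fun _ => PySem.List.pyRepeat [false] ((grid.headD []).length : Int)), grid, (-1 : Int)) :=
    nested_fold_eq grid hW
      (fun st (p : Int × Int) => pvStepA grid (gH grid) (gW grid) st p.1 p.2) _
  rw [most_colorful_subgrid, if_neg hne]
  dsimp only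
  rw [conv1]
  have hInv0 : InvA grid [] ((PySem.List.pyRange 0 (grid.length : Int) 1).map
      (fun _ => PySem.List.pyRepeat [false] ((grid.headD []).length : Int)), grid, (-1 : Int)) := by
    refine ⟨vis0_shape grid, ?_, rfl⟩
    intro p h1 h2
    rw [vis0_false grid p h1 h2]
    simp
  have hfin := foldA grid hW (LL grid) [] _ (by simp) hInv0
  rw [List.nil_append] at hfin
  rw [hfin.2.2]

lemma B_final (grid : List (List Int)) (hW : 0 < gW grid)
    (hne : ¬ (grid = [] ∨ grid.headD [] = [])) :
    most_colorful_subgrid_alt grid =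
      ((candList grid (LL grid)).foldl (pvSelStep grid) (grid, -1)).1 := by
  have conv1 : (PySem.List.pyRange 0 (grid.length : Int) 1).foldl
      (fun par r => (PySem.List.pyRange 0 ((grid.headD []).length : Int) 1).foldl
        (fun par c => pvUnionCell grid (grid.length : Int) ((grid.headD []).length : Int) par r c) par)
      (PySem.List.pyRange 0 ((grid.length : Int) * ((grid.headD []).length : Int)) 1)
      = (LL grid).foldl
        (fun par (p : Int × Int) => pvUnionCell grid (gH grid) (gW grid) par p.1 p.2)
        (PySem.List.pyRange 0 ((grid.length : Int) * ((grid.headD []).length : Int)) 1) :=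
    nested_fold_eq grid hW
      (fun par (p : Int × Int) => pvUnionCell grid (gH grid) (gW grid) par p.1 p.2) _
  rw [most_colorful_subgrid_alt, if_neg hne]
  dsimp only
  rw [conv1]
  generalize hpar : (LL grid).foldl
      (fun par (p : Int × Int) => pvUnionCell grid (gH grid) (gW grid) par p.1 p.2)
      (PySem.List.pyRange 0 ((grid.length : Int) * ((grid.headD []).length : Int)) 1) = parentL
  have hInv1 : Inv1 grid (LL grid) parentL := by
    rw [← hpar]
    have h0 : Inv1 grid []
        (PySem.List.pyRange 0 ((grid.length : Int) * ((grid.headD []).length : Int)) 1) :=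
      ⟨PInv_init grid, by simp⟩
    have := fold1 grid hW (LL grid) [] _ (by simp) h0
    simpa using this
  have conv2 : (PySem.List.pyRange 0 (grid.length : Int) 1).foldl
      (fun bx r => (PySem.List.pyRange 0 ((grid.headD []).length : Int) 1).foldl
        (fun bx c => pvBoxCell grid (grid.length : Int) ((grid.headD []).length : Int) parentL bx r c) bx)
      PySem.Dict.empty
      = (LL grid).foldl
        (fun bx (p : Int × Int) => pvBoxCell grid (gH grid) (gW grid) parentL bx p.1 p.2)
        PySem.Dict.empty :=
    nested_fold_eq grid hW
      (fun bx (p : Int × Int) => pvBoxCell grid (gH grid) (gW grid) parentL bx p.1 p.2) _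
  rw [conv2]
  have hboxes := fold2 grid hW hInv1 (LL grid) [] PySem.Dict.empty (by simp) rfl
  rw [List.nil_append] at hboxes
  have hvals : PySem.Dict.values ((LL grid).foldl
      (fun bx (p : Int × Int) => pvBoxCell grid (gH grid) (gW grid) parentL bx p.1 p.2)
      PySem.Dict.empty) = (minsIn grid (LL grid)).map (fun s => bbF (classIn grid (LL grid) s)) := by
    simp only [PySem.Dict.values, hboxes, List.map_map]
    rfl
  rw [hvals, fold_values_eq grid]

-- ===== VERDICT (by name: the statement is the Claim_ definition above) =====
theorem most_colorful_subgrid_spec : Claim_equal_most_colorful_subgrid := by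
  intro grid _hdom _hpre
  rw [Spec_most_colorful_subgrid]
  by_cases hemp : grid = [] ∨ grid.headD [] = []
  · rw [most_colorful_subgrid, most_colorful_subgrid_alt, if_pos hemp, if_pos hemp]
  · have h2 : grid.headD [] ≠ [] := (not_or.1 hemp).2
    have hW : 0 < gW grid := by
      rw [gW]
      exact_mod_cast Nat.pos_of_ne_zero (fun h0 => h2 (List.eq_nil_of_length_eq_zero h0))
    rw [A_final grid hW hemp, B_final grid hW hemp]
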